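-- pv_equiv track=rewrite | github.com/valerio-afk/nms | backend_server/utils/config.py | collapse_permissions
-- ===== SOURCE A (Python) =====
-- from typing import Optional, Dict, List, Any, Type, Tuple
--
-- def collapse_permissions(user_permissions:List[str], all_permissions:List[str]) -> List[str]:
--     def build_nested(perms):
--         root = {}
--         for perm in perms:
--             node = root
--             for part in perm.split("."):
--                 node = node.setdefault(part, {})
--         return root
--
--     all_tree = build_nested(all_permissions)
--     user_tree = build_nested(user_permissions)
--
--     # special case: user has everything
--     if set(user_permissions) == set(all_permissions):
--         return ["*"]
--
--     result = []
--
--     def reduce(all_node, user_node, path):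
--
--         # if user does not have this branch
--         if user_node is None:
--             return False
--
--         # leaf node
--         if not all_node:
--             result.append(".".join(path))
--             return True
--
--         all_owned = True
--
--         for key, child in all_node.items():
--             owned = reduce(
--                 child,
--                 user_node.get(key) if user_node else None,
--                 path + [key]
--             )
--             if not owned:
--                 all_owned = False
--
--         if all_owned:
--             prefix = ".".join(path)
--
--             # remove children (collapse)
--             result[:] = [
--                 r for r in result
--                 if not r.startswith(prefix + ".")
--             ]
--
--             result.append(prefix + ".*")
--             return True
--
--         return False
--
--     for key, child in all_tree.items():
--         reduce(child, user_tree.get(key), [key])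
--
--     return sorted(set(result))
-- ===== SOURCE B (Python) =====
-- def collapse_permissions(user_permissions, all_permissions):
--     if set(user_permissions) == set(all_permissions):
--         return ["*"]
--
--     # flat, non-recursive formulation over segment tuples:
--     # leaves = maximal permission paths; a prefix is "owned" iff it is a prefix
--     # of no uncovered leaf; each covered leaf reports its shortest owned prefix.
--     allt = {tuple(p.split(".")) for p in all_permissions}
--     strict = {q[:k] for q in allt for k in range(1, len(q))}
--     leaves = allt - strict
--
--     userpref = {tuple(u.split("."))[:k] for u in user_permissions
--                 for k in range(len(u.split(".")) + 1)}
--     covered = {l for l in leaves if l in userpref}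
--     bad = {l[:k] for l in leaves - covered for k in range(1, len(l) + 1)}
--
--     out = set()
--     for l in covered:
--         k = 1
--         while l[:k] in bad:
--             k += 1
--         p = ".".join(l[:k])
--         out.add(p if k == len(l) else p + ".*")
--     return sorted(out)
-- ===== Notes on version B (the rewrite author's own statement) =====
-- stated objective: alternative
-- what changed: B drops A's nested-dict trees, recursive reduce() and per-collapse startswith rescans of a shared result list entirely: it computes the leaf set as a set difference (all paths minus proper prefixes), marks a prefix 'owned' iff it is a prefix of no uncovered leaf (one precomputed 'bad'-prefix set), and each covered leaf simply reports its shortest owned prefix.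
import Mathlib
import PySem

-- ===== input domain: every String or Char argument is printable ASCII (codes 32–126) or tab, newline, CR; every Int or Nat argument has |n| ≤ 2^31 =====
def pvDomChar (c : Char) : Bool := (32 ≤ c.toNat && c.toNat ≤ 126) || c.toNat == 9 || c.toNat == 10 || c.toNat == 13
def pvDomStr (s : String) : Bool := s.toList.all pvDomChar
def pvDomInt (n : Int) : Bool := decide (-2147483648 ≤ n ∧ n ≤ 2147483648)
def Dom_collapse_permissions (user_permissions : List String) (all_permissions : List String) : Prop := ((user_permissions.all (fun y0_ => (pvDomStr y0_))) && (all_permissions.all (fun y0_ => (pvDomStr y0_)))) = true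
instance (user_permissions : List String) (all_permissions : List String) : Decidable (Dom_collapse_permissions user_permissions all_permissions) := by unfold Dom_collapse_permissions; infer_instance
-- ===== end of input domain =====

-- B replaces A's recursive tree walk (with its per-collapse rescans of a shared result list) by a flat,
-- non-recursive set computation over segment-tuple prefixes; a genuinely different algorithm of similar cost.

-- ===== PORT A =====
inductive Forest where
  | nil : Forest
  | cons : String → Forest → Forest → Forest
deriving DecidableEq, Repr

def Forest.get? : Forest → String → Option Forest
  | .nil, _ => none
  | .cons k c rest, x => if k == x then some c else rest.get? x

def Forest.insertPath : Forest → List String → Forest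
  | f, [] => f
  | .nil, p :: ps => .cons p (Forest.insertPath .nil ps) .nil
  | .cons k c rest, p :: ps =>
      if k == p then .cons k (Forest.insertPath c ps) rest
      else .cons k c (Forest.insertPath rest (p :: ps))
termination_by f l => (l.length, sizeOf f)
decreasing_by all_goals simp_wf <;> omega

def segsA (s : String) : List String := (PySem.Str.split? s ".").getD []

def buildNested (perms : List String) : Forest :=
  perms.foldl (fun root perm => root.insertPath (segsA perm)) .nil

mutual
def reduceA (f : Forest) (uo : Option Forest) (path : List String) (res : List String) :
    Bool × List String :=
  match f, uo with
  | _, none => (false, res)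
  | .nil, some _ => (true, res ++ [PySem.Str.join "." path])
  | .cons k c rest, some uF =>
      let st := reduceChildren (.cons k c rest) uF path true res
      if st.1 then
        (true, (st.2.filter fun r => !(PySem.Str.startswith r (PySem.Str.join "." path ++ "."))) ++
               [PySem.Str.join "." path ++ ".*"])
      else (false, st.2)
termination_by (sizeOf f, 1)
decreasing_by all_goals simp_wf <;> omega

def reduceChildren (f : Forest) (uF : Forest) (path : List String) (acc : Bool) (res : List String) :
    Bool × List String :=
  match f with
  | .nil => (acc, res)
  | .cons k c rest =>
      let r := reduceA c (if uF = Forest.nil then none else uF.get? k) (path ++ [k]) res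
      reduceChildren rest uF path (acc && r.1) r.2
termination_by (sizeOf f, 0)
decreasing_by all_goals simp_wf <;> omega
end

def collapseLoop : Forest → Forest → List String → List String
  | .nil, _, res => res
  | .cons k c rest, uT, res => collapseLoop rest uT (reduceA c (uT.get? k) [k] res).2

def collapse_permissions (user_permissions : List String) (all_permissions : List String) : List String :=
  let all_tree := buildNested all_permissions
  let user_tree := buildNested user_permissions
  if PySem.Set.equal (PySem.Set.ofList user_permissions) (PySem.Set.ofList all_permissions) then ["*"]
  else
    PySem.List.sorted (PySem.Set.ofList (collapseLoop all_tree user_tree [])) (fun x => x) false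
-- ===== PORT B =====
def segsB (s : String) : List String := (PySem.Str.split? s ".").getD []   -- s.split("."), sep non-empty so never an error

-- the 'while l[:k] in bad: k += 1' loop; fuel len(l)+1 always covers the real iteration count,
-- since l itself is never a member of bad on any reachable call (proved below)
def whileK (bad : PySem.Set (List String)) (l : List String) : Nat → Int → Int
  | 0, k => k
  | fuel+1, k =>
      if PySem.Set.contains bad (PySem.List.slice l none (some k)) then whileK bad l fuel (k+1) else k

def collapse_permissions_alt (user_permissions : List String) (all_permissions : List String) : List String :=
  if PySem.Set.equal (PySem.Set.ofList user_permissions) (PySem.Set.ofList all_permissions) then ["*"]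
  else
    -- allt = {tuple(p.split(".")) for p in all_permissions}
    let allt : PySem.Set (List String) := PySem.Set.ofList (all_permissions.map segsB)
    -- strict = {q[:k] for q in allt for k in range(1, len(q))}
    let strict : PySem.Set (List String) :=
      PySem.Set.ofList (allt.flatMap (fun q =>
        (PySem.List.pyRange 1 (q.length : Int) 1).map (fun k => PySem.List.slice q none (some k))))
    let leaves : PySem.Set (List String) := PySem.Set.diff allt strict
    -- userpref = {tuple(u.split("."))[:k] for u in user_permissions for k in range(len(u.split(".")) + 1)}
    let userpref : PySem.Set (List String) :=
      PySem.Set.ofList (user_permissions.flatMap (fun s =>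
        (PySem.List.pyRange 0 ((segsB s).length + 1 : Int) 1).map (fun k => PySem.List.slice (segsB s) none (some k))))
    -- covered = {l for l in leaves if l in userpref}
    let covered : PySem.Set (List String) :=
      PySem.Set.ofList (leaves.filter (fun l => PySem.Set.contains userpref l))
    -- bad = {l[:k] for l in leaves - covered for k in range(1, len(l) + 1)}
    let bad : PySem.Set (List String) :=
      PySem.Set.ofList ((PySem.Set.diff leaves covered).flatMap (fun l =>
        (PySem.List.pyRange 1 ((l.length : Int) + 1) 1).map (fun k => PySem.List.slice l none (some k))))
    -- for l in covered: k = 1; while l[:k] in bad: k += 1; out.add(...)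
    let out : PySem.Set String := covered.foldl (fun out l =>
        let k := whileK bad l (l.length + 1) 1
        let p := PySem.Str.join "." (PySem.List.slice l none (some k))
        PySem.Set.add out (if k = (l.length : Int) then p else p ++ ".*")) PySem.Set.empty
    PySem.List.sorted out (fun x => x) false

-- ===== PRECONDITION & SPEC =====
def Spec_collapse_permissions (user_permissions : List String) (all_permissions : List String) (out : List String) : Prop := out = collapse_permissions_alt user_permissions all_permissions
instance (user_permissions : List String) (all_permissions : List String) (out : List String) : Decidable (Spec_collapse_permissions user_permissions all_permissions out) := by unfold Spec_collapse_permissions; infer_instance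

-- ===== CLAIM (what is proved, stated in full; the proofs are below) =====
def Claim_equal_collapse_permissions : Prop := ∀ (user_permissions : List String) (all_permissions : List String), Dom_collapse_permissions user_permissions all_permissions → Spec_collapse_permissions user_permissions all_permissions (collapse_permissions user_permissions all_permissions)

-- ===== LEMMAS AND PROOFS =====

def W (l : List (List String)) : Nat := (l.map List.length).sum

def groupB (parts : List (List String)) : PySem.Dict String (List (List String)) :=
  parts.foldl
    (fun d p => match p with
      | [] => d
      | h :: t => d.modify h [] (· ++ [t]))
    PySem.Dict.empty

theorem mem_items_insert {κ ν : Type} [BEq κ] (d : PySem.Dict κ ν) (k : κ) (v : ν)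
    (kt : κ × ν) (h : kt ∈ (d.insert k v).items) : kt = (k, v) ∨ kt ∈ d.items := by
  unfold PySem.Dict.insert at h
  split at h
  · simp only [List.mem_map] at h
    obtain ⟨p, hp, hpe⟩ := h
    by_cases hk : (p.1 == k) = true
    · simp only [hk, if_true] at hpe; left; exact hpe.symm
    · simp only [hk, if_false] at hpe; right; exact hpe ▸ hp
  · simp only [List.mem_append, List.mem_singleton] at h
    rcases h with h | h
    · right; exact h
    · left; exact h

theorem getD_mem_or_dflt {κ ν : Type} [BEq κ] (d : PySem.Dict κ ν) (k : κ) (dflt : ν) :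
    (∃ q ∈ d.items, q.2 = PySem.Dict.getD d k dflt) ∨ PySem.Dict.getD d k dflt = dflt := by
  unfold PySem.Dict.getD PySem.Dict.get?
  cases hf : d.items.find? (fun p => p.1 == k) with
  | none => right; simp [hf]
  | some q => left; exact ⟨q, List.mem_of_find?_eq_some hf, by simp [hf]⟩

theorem groupB_bound : ∀ (l : List (List String)) (d : PySem.Dict String (List (List String))) (N : Nat),
    (∀ kt ∈ d.items, kt.2 ≠ [] ∧ W kt.2 + kt.2.length ≤ N) →
    ∀ kt ∈ (l.foldl (fun d p => match p with | [] => d | h :: t => d.modify h [] (· ++ [t])) d).items,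
      kt.2 ≠ [] ∧ W kt.2 + kt.2.length ≤ N + W l := by
  intro l
  induction l with
  | nil => intro d N hd kt hkt; have := hd kt hkt; simpa [W] using this
  | cons p rest ih =>
    intro d N hd kt hkt
    simp only [List.foldl_cons] at hkt
    have key : ∀ kt ∈ ((match p with | [] => d | h :: t => d.modify h [] (· ++ [t])) :
        PySem.Dict String (List (List String))).items, kt.2 ≠ [] ∧ W kt.2 + kt.2.length ≤ N + p.length := by
      match p with
      | [] => intro kt hkt; have := hd kt hkt; exact ⟨this.1, by omega⟩
      | h :: t =>
        intro kt hkt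
        unfold PySem.Dict.modify at hkt
        rcases mem_items_insert _ _ _ _ hkt with he | ho
        · subst he
          constructor
          · simp
          · rcases getD_mem_or_dflt d h [] with ⟨q, hq, hqe⟩ | hnil
            · have := (hd q hq).2
              simp only [W, List.map_append, List.sum_append, List.length_append] at *
              simp only [hqe] at this
              simp [W] at this ⊢
              omega
            · simp [hnil, W]
        · have := hd kt ho; exact ⟨this.1, by omega⟩
    have := ih _ (N + p.length) key kt hkt
    refine ⟨this.1, ?_⟩
    have h2 := this.2
    simp only [W, List.map_cons, List.sum_cons] at h2 ⊢
    omega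

theorem groupB_W_lt (alls : List (List String)) (kt : String × List (List String))
    (h : kt ∈ (groupB alls).items) : W kt.2 < W alls := by
  unfold groupB at h
  have hb := groupB_bound alls PySem.Dict.empty 0
    (by intro kt hkt; simp [PySem.Dict.empty] at hkt) kt h
  have h2 := hb.2
  have hlen : 1 ≤ kt.2.length := by
    cases h2 : kt.2 with
    | nil => exact absurd h2 hb.1
    | cons a b => simp
  omega

mutual
def recB (alls users : List (List String)) (path : String) : Bool × List String :=
  if users = [] then (false, [])
  else
    let g := groupB alls
    if g.items.isEmpty then (true, [path])
    else
      let gu := groupB users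
      let st := recBGo (W alls) (groupB alls).items (fun kt hkt => groupB_W_lt alls kt hkt)
                  gu path (true, [])
      if st.1 then (true, [path ++ ".*"]) else (false, st.2)
termination_by (W alls, 1, 0)
decreasing_by exact Prod.Lex.right _ (Prod.Lex.left _ _ (by omega))

def recBGo (n : Nat) (entries : List (String × List (List String)))
    (h : ∀ kt ∈ entries, W kt.2 < n)
    (gu : PySem.Dict String (List (List String))) (path : String) (st : Bool × List String) :
    Bool × List String :=
  match entries, h with
  | [], _ => st
  | kt :: rest, h =>
      let r := recB kt.2 (PySem.Dict.getD gu kt.1 []) (path ++ "." ++ kt.1)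
      recBGo n rest (fun x hx => h x (List.mem_cons_of_mem _ hx)) gu path (st.1 && r.1, st.2 ++ r.2)
termination_by (n, 0, entries.length + 1)
decreasing_by
  · exact Prod.Lex.left _ _ (h _ (List.mem_cons_self ..))
  · exact Prod.Lex.right _ (Prod.Lex.right _ (by simp))
end
def jC (l : List String) : List Char := PySem.Chars.join ['.'] (l.map String.toList)

def Dotted (r : List Char) : Prop := r = [] ∨ ∃ r', r = '.' :: r'

def DF (l : List String) : Prop := ∀ s ∈ l, '.' ∉ s.toList
def DFF (ps : List (List String)) : Prop := ∀ p ∈ ps, DF p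

theorem jC_single (a : String) : jC [a] = a.toList := by simp [jC, PySem.Chars.join_singleton]
theorem jC_cons₂ (a b : String) (t : List String) :
    jC (a :: b :: t) = a.toList ++ '.' :: jC (b :: t) := by
  simp [jC, PySem.Chars.join_cons_cons]
theorem jC_append (l e : List String) (hl : l ≠ []) (he : e ≠ []) :
    jC (l ++ e) = jC l ++ '.' :: jC e := by
  induction l with
  | nil => exact absurd rfl hl
  | cons a l ih =>
    cases l with
    | nil =>
      cases e with
      | nil => exact absurd rfl he
      | cons b t => simp [jC_single, jC_cons₂]
    | cons a' l' =>
      calc jC (a :: a' :: l' ++ e) = a.toList ++ '.' :: jC (a' :: l' ++ e) := by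
              have h1 : (a :: a' :: l') ++ e = a :: a' :: (l' ++ e) := by simp
              rw [h1]
              exact jC_cons₂ a a' (l' ++ e)
        _ = a.toList ++ '.' :: (jC (a' :: l') ++ '.' :: jC e) := by rw [ih (by simp)]
        _ = jC (a :: a' :: l') ++ '.' :: jC e := by rw [jC_cons₂]; simp
theorem jC_snoc (l : List String) (k : String) (hl : l ≠ []) :
    jC (l ++ [k]) = jC l ++ '.' :: k.toList := by
  rw [jC_append l [k] hl (by simp), jC_single]
theorem jC_head (k : String) (e : List String) :
    ∃ r, jC (k :: e) = k.toList ++ r ∧ Dotted r := by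
  cases e with
  | nil => exact ⟨[], by simp [jC_single], Or.inl rfl⟩
  | cons b t => exact ⟨'.' :: jC (b :: t), by simp [jC_cons₂], Or.inr ⟨_, rfl⟩⟩
theorem SJ_toList (l : List String) : (PySem.Str.join "." l).toList = jC l := by
  rw [PySem.Str.toList_join]; rfl
theorem SJ_single (k : String) : PySem.Str.join "." [k] = k := by
  rw [← String.toList_inj, SJ_toList, jC_single]
theorem SJ_snoc (l : List String) (k : String) (hl : l ≠ []) :
    PySem.Str.join "." (l ++ [k]) = PySem.Str.join "." l ++ "." ++ k := by
  rw [← String.toList_inj, SJ_toList, jC_snoc l k hl]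
  simp [String.toList_append]
  rfl

theorem seg_eq (a b r1 r2 : List Char) (ha : '.' ∉ a) (hb : '.' ∉ b)
    (h1 : Dotted r1) (h2 : Dotted r2) (h : a ++ r1 = b ++ r2) : a = b ∧ r1 = r2 := by
  induction a generalizing b with
  | nil =>
    cases b with
    | nil => simpa using h
    | cons d b' =>
      exfalso
      rcases h1 with h1 | ⟨r', h1⟩
      · subst h1; simp at h
      · subst h1
        simp only [List.nil_append, List.cons_append, List.cons.injEq] at h
        exact hb (by rw [← h.1]; exact List.mem_cons_self ..)
  | cons c a' ih =>
    cases b with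
    | nil =>
      exfalso
      rcases h2 with h2 | ⟨r', h2⟩
      · subst h2; simp at h
      · subst h2
        simp only [List.nil_append, List.cons_append, List.cons.injEq] at h
        exact ha (by rw [h.1]; exact List.mem_cons_self ..)
    | cons d b' =>
      simp only [List.cons_append, List.cons.injEq] at h
      obtain ⟨rfl, h⟩ := h
      have := ih b' (fun hm => ha (List.mem_cons_of_mem _ hm))
        (fun hm => hb (List.mem_cons_of_mem _ hm)) h
      exact ⟨by rw [this.1], this.2⟩

theorem seg_prefix (a b r : List Char) (ha : '.' ∉ a) (hb : '.' ∉ b)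
    (hr : Dotted r) (h : (b ++ ['.']) <+: (a ++ r)) : b = a ∧ ∃ r', r = '.' :: r' := by
  obtain ⟨t, ht⟩ := h
  have h0 : b ++ ('.' :: t) = a ++ r := by simpa using ht
  have := seg_eq b a ('.' :: t) r hb ha (Or.inr ⟨t, rfl⟩) hr h0
  exact ⟨this.1, t, this.2.symm⟩

theorem sib_ne (pl : List String) (k1 k2 : String) (e1 e2 : List String)
    (h1 : '.' ∉ k1.toList) (h2 : '.' ∉ k2.toList) (hk : k1 ≠ k2) :
    jC (pl ++ k1 :: e1) ≠ jC (pl ++ k2 :: e2) := by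
  intro h
  obtain ⟨r1, hr1, hd1⟩ := jC_head k1 e1
  obtain ⟨r2, hr2, hd2⟩ := jC_head k2 e2
  have hkk : k1.toList ++ r1 = k2.toList ++ r2 := by
    cases pl with
    | nil => simpa [hr1, hr2] using h
    | cons a l =>
      rw [jC_append _ _ (by simp) (by simp), jC_append _ _ (by simp) (by simp), hr1, hr2] at h
      exact by simpa using h
  have := seg_eq _ _ _ _ h1 h2 hd1 hd2 hkk
  exact hk (String.toList_inj.mp this.1)

theorem sib_nonprefix (pl : List String) (k1 k2 : String) (e1 : List String)
    (h1 : '.' ∉ k1.toList) (h2 : '.' ∉ k2.toList) (hk : k1 ≠ k2) :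
    ¬ (jC (pl ++ [k2]) ++ ['.']) <+: jC (pl ++ k1 :: e1) := by
  intro h
  obtain ⟨r1, hr1, hd1⟩ := jC_head k1 e1
  have h' : (k2.toList ++ ['.']) <+: (k1.toList ++ r1) := by
    cases pl with
    | nil => simpa [hr1, jC_single] using h
    | cons a l =>
      rw [jC_snoc _ _ (by simp), jC_append _ _ (by simp) (by simp), hr1] at h
      have h'' := (List.prefix_append_right_inj (jC (a :: l))).mp
        (by simpa [List.append_assoc] using h)
      simpa [List.cons_prefix_cons] using h''
  have := seg_prefix _ _ _ h1 h2 hd1 h'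
  exact hk (String.toList_inj.mp this.1.symm)

theorem child_prefix (pl : List String) (k : String) (e : List String) (hpl : pl ≠ []) :
    (jC pl ++ ['.']) <+: jC (pl ++ k :: e) := by
  rw [jC_append _ _ hpl (by simp)]
  exact ⟨jC (k :: e), by simp⟩

theorem nonprefix_mono (pl : List String) (k : String) (r : List Char) (hpl : pl ≠ [])
    (h : ¬ (jC pl ++ ['.']) <+: r) : ¬ (jC (pl ++ [k]) ++ ['.']) <+: r := by
  intro hbig
  exact h (List.IsPrefix.trans ⟨k.toList ++ ['.'], by rw [jC_snoc _ _ hpl]; simp⟩ hbig)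

def splitAux : List Char → List Char → List (List Char)
  | [], cur => [cur.reverse]
  | c :: rest, cur => if c = '.' then cur.reverse :: splitAux rest [] else splitAux rest (c :: cur)

theorem splitOn_go_eq (fuel : Nat) (l cur : List Char) (acc : List (List Char)) (hf : l.length ≤ fuel) :
    PySem.Chars.splitOn.go ['.'] fuel l cur acc = acc.reverse ++ splitAux l cur := by
  induction fuel generalizing l cur acc with
  | zero =>
    have : l = [] := List.length_eq_zero_iff.mp (Nat.le_zero.mp hf)
    subst this
    rw [PySem.Chars.splitOn.go]
    simp [splitAux]
  | succ fuel ih =>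
    cases l with
    | nil =>
      rw [PySem.Chars.splitOn.go]
      simp [splitAux]
      simp
    | cons c rest =>
      rw [PySem.Chars.splitOn.go]
      by_cases hc : c = '.'
      · subst hc
        have hp : List.isPrefixOf ['.'] ('.' :: rest) = true := by simp [List.isPrefixOf]
        simp only [hp, if_true]
        rw [ih]
        · simp [splitAux]
        · simpa using Nat.le_of_succ_le_succ hf
      · have hp : List.isPrefixOf ['.'] (c :: rest) = false := by
          simp [List.isPrefixOf]; exact fun h => absurd h.symm hc
        simp only [hp]
        rw [if_neg (by simp [hc]), ih rest (c :: cur) acc (Nat.le_of_succ_le_succ (by simpa using hf))]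
        simp [splitAux, hc]

theorem splitOn_eq (cs : List Char) : PySem.Chars.splitOn cs ['.'] = splitAux cs [] := by
  unfold PySem.Chars.splitOn
  rw [splitOn_go_eq (cs.length + 1) cs [] [] (by omega)]
  simp

theorem splitAux_dotfree (l cur : List Char) (hc : '.' ∉ cur) :
    ∀ p ∈ splitAux l cur, '.' ∉ p := by
  induction l generalizing cur with
  | nil => intro p hp; simp [splitAux] at hp; subst hp; simpa using hc
  | cons c rest ih =>
    intro p hp
    by_cases hcd : c = '.'
    · subst hcd
      have hp' : p = cur.reverse ∨ p ∈ splitAux rest [] := by simpa [splitAux] using hp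
      rcases hp' with rfl | hp'
      · simpa using hc
      · exact ih [] (by simp) p hp'
    · simp only [splitAux, if_neg hcd] at hp
      exact ih (c :: cur) (by simp [hcd, hc]; exact fun h => absurd h.symm hcd) p hp

theorem segsA_dotfree (s : String) : DF (segsA s) := by
  intro x hx
  unfold segsA PySem.Str.split? PySem.Chars.split? at hx
  simp only [List.isEmpty_iff] at hx
  rw [if_neg (by simp)] at hx
  simp only [Option.map_some, Option.getD_some, List.mem_map] at hx
  obtain ⟨p, hp, rfl⟩ := hx
  rw [String.toList_ofList]
  have : ("." : String).toList = ['.'] := rfl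
  rw [this, splitOn_eq] at hp
  exact splitAux_dotfree _ [] (by simp) p hp

def addTail : List (String × List (List String)) → String → List String → List (String × List (List String))
  | [], h, t => [(h, [t])]
  | (k, ts) :: rest, h, t => if k = h then (k, ts ++ [t]) :: rest else (k, ts) :: addTail rest h t

def gstep (es : List (String × List (List String))) (p : List String) : List (String × List (List String)) :=
  match p with
  | [] => es
  | h :: t => addTail es h t

def gfold (l : List (List String)) (es : List (String × List (List String))) : List (String × List (List String)) :=
  l.foldl gstep es

def lookupA (es : List (String × List (List String))) (k : String) : Option (List (List String)) :=
  (es.find? (fun p => p.1 == k)).map (·.2)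

def keysND (es : List (String × List (List String))) : Prop := (es.map Prod.fst).Nodup

def tailsAt (k : String) (l : List (List String)) : List (List String) :=
  l.filterMap (fun u => match u with | [] => none | h :: t => if h = k then some t else none)

theorem items_modify (es : List (String × List (List String))) (h : String) (t : List String)
    (hnd : keysND es) :
    (PySem.Dict.modify (PySem.Dict.mk es) h [] (· ++ [t])).items = addTail es h t := by
  induction es with
  | nil =>
    simp [PySem.Dict.modify, PySem.Dict.insert, PySem.Dict.getD, PySem.Dict.get?,
      PySem.Dict.contains, addTail]
  | cons kt rest ih =>
    obtain ⟨k, ts⟩ := kt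
    have hndr : keysND rest := (List.nodup_cons.mp hnd).2
    have hknr : k ∉ rest.map Prod.fst := (List.nodup_cons.mp hnd).1
    by_cases hk : k = h
    · subst hk
      have hc : (PySem.Dict.mk ((k, ts) :: rest)).contains k = true := by
        simp [PySem.Dict.contains]
      have hg : (PySem.Dict.mk ((k, ts) :: rest)).getD k [] = ts := by
        simp [PySem.Dict.getD, PySem.Dict.get?]
      unfold PySem.Dict.modify PySem.Dict.insert
      rw [hg, hc, if_pos rfl]
      simp only [addTail, if_pos rfl]
      simp only [List.map_cons, BEq.rfl, if_pos rfl]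
      congr 1
      have : ∀ p ∈ rest, (if (p.1 == k) = true then (k, ts ++ [t]) else p) = p := by
        intro p hp
        rw [if_neg]
        simp only [beq_iff_eq]
        intro hpk
        exact hknr (hpk ▸ List.mem_map_of_mem hp)
      rw [List.map_congr_left this]
      simp
    · have hc : (PySem.Dict.mk ((k, ts) :: rest)).contains h = (PySem.Dict.mk rest).contains h := by
        simp [PySem.Dict.contains, List.any_cons, beq_iff_eq, hk]
      have hg : (PySem.Dict.mk ((k, ts) :: rest)).getD h [] = (PySem.Dict.mk rest).getD h [] := by
        simp [PySem.Dict.getD, PySem.Dict.get?, List.find?_cons, beq_iff_eq, hk]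
      have ihr := ih hndr
      unfold PySem.Dict.modify PySem.Dict.insert at ihr ⊢
      rw [hg, hc]
      simp only [addTail, if_neg hk]
      by_cases hcr : (PySem.Dict.mk rest).contains h = true
      · rw [if_pos hcr] at ihr ⊢
        simp only [List.map_cons] at ⊢
        rw [if_neg (by simp [beq_iff_eq, hk])]
        simp only [← ihr]
      · rw [if_neg hcr] at ihr ⊢
        simp only [← ihr]
        simp

theorem keys_addTail (es : List (String × List (List String))) (h : String) (t : List String) :
    (addTail es h t).map Prod.fst = es.map Prod.fst ∨
    (addTail es h t).map Prod.fst = es.map Prod.fst ++ [h] ∧ h ∉ es.map Prod.fst := by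
  induction es with
  | nil => right; simp [addTail]
  | cons kt rest ih =>
    obtain ⟨k, ts⟩ := kt
    by_cases hk : k = h
    · left; simp [addTail, hk]
    · rcases ih with ih | ⟨ih, hnm⟩
      · left; simp [addTail, hk, ih]
      · right
        constructor
        · simp [addTail, hk, ih]
        · simp only [List.map_cons, List.mem_cons]
          rintro (h1 | h1)
          · exact hk h1.symm
          · exact hnm h1

theorem addTail_keysND (es : List (String × List (List String))) (h : String) (t : List String)
    (hnd : keysND es) : keysND (addTail es h t) := by
  unfold keysND at *
  rcases keys_addTail es h t with he | ⟨he, hnm⟩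
  · rw [he]; exact hnd
  · rw [he]
    rw [List.nodup_append]
    refine ⟨hnd, List.nodup_singleton _, ?_⟩
    intro a ha b hb
    have hbh : b = h := by simpa using hb
    subst hbh
    exact fun he => hnm (he ▸ ha)

theorem gstep_keysND (es : List (String × List (List String))) (p : List String)
    (hnd : keysND es) : keysND (gstep es p) := by
  cases p with
  | nil => exact hnd
  | cons h t => exact addTail_keysND es h t hnd

theorem gfold_keysND (l : List (List String)) (es : List (String × List (List String)))
    (hnd : keysND es) : keysND (gfold l es) := by
  induction l generalizing es with
  | nil => exact hnd
  | cons p rest ih => exact ih (gstep es p) (gstep_keysND es p hnd)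

theorem groupB_items_aux (l : List (List String)) :
    ∀ es, keysND es →
      (l.foldl (fun d p => match p with | [] => d | h :: t => d.modify h [] (· ++ [t]))
        (PySem.Dict.mk es)).items = gfold l es := by
  induction l with
  | nil => intro es _; rfl
  | cons p rest ih =>
    intro es hnd
    simp only [List.foldl_cons]
    have hstep : ((match p with
        | [] => PySem.Dict.mk es
        | h :: t => (PySem.Dict.mk es).modify h [] (· ++ [t])) : PySem.Dict String (List (List String)))
        = PySem.Dict.mk (gstep es p) := by
      cases p with
      | nil => rfl
      | cons h t =>
        apply PySem.Dict.ext
        exact items_modify es h t hnd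
    rw [hstep]
    exact ih (gstep es p) (gstep_keysND es p hnd)

theorem groupB_items (l : List (List String)) :
    (groupB l).items = gfold l [] ∧ keysND (gfold l []) := by
  constructor
  · unfold groupB
    have : (PySem.Dict.empty : PySem.Dict String (List (List String))) = PySem.Dict.mk [] := rfl
    rw [this]
    exact groupB_items_aux l [] (by simp [keysND])
  · exact gfold_keysND l [] (by simp [keysND])

theorem lookupA_cons_eq (kt : String × List (List String)) (xs : List (String × List (List String)))
    (k : String) (h : kt.1 = k) : lookupA (kt :: xs) k = some kt.2 := by
  simp [lookupA, List.find?_cons, h]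

theorem lookupA_cons_ne (kt : String × List (List String)) (xs : List (String × List (List String)))
    (k : String) (h : kt.1 ≠ k) : lookupA (kt :: xs) k = lookupA xs k := by
  simp [lookupA, List.find?_cons, h]

theorem lookupA_addTail (es : List (String × List (List String))) (h : String) (t : List String) (k : String) :
    lookupA (addTail es h t) k =
      if k = h then some ((lookupA es h).getD [] ++ [t]) else lookupA es k := by
  induction es with
  | nil =>
    by_cases hk : k = h
    · subst hk; rw [if_pos rfl]; simp [addTail, lookupA]
    · rw [if_neg hk]
      simp only [addTail]
      rw [lookupA_cons_ne _ _ _ (by simpa using fun he => hk he.symm)]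
  | cons kt rest ih =>
    obtain ⟨k', ts⟩ := kt
    by_cases hk' : k' = h
    · subst hk'
      have hadd : addTail ((k', ts) :: rest) k' t = (k', ts ++ [t]) :: rest := by
        simp [addTail]
      rw [hadd]
      by_cases hk : k = k'
      · subst hk
        rw [if_pos rfl, lookupA_cons_eq _ _ _ rfl, lookupA_cons_eq _ _ _ rfl]
        simp
      · rw [if_neg hk, lookupA_cons_ne _ _ _ (fun he => hk he.symm),
          lookupA_cons_ne _ _ _ (fun he => hk he.symm)]
    · simp only [addTail, if_neg hk']
      by_cases hk : k = k'
      · subst hk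
        rw [if_neg hk', lookupA_cons_eq _ _ _ rfl, lookupA_cons_eq _ _ _ rfl]
      · rw [lookupA_cons_ne _ _ _ (fun he => hk he.symm)]
        rw [ih]
        by_cases hkh : k = h
        · subst hkh
          rw [if_pos rfl, if_pos rfl]
          rw [lookupA_cons_ne _ _ _ (fun he => hk he.symm)]
        · rw [if_neg hkh, if_neg hkh, lookupA_cons_ne _ _ _ (fun he => hk he.symm)]

theorem lookupA_gfold (l : List (List String)) (es : List (String × List (List String))) (k : String) :
    lookupA (gfold l es) k =
      match lookupA es k with
      | some v => some (v ++ tailsAt k l)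
      | none => if tailsAt k l = [] then none else some (tailsAt k l) := by
  induction l generalizing es with
  | nil =>
    cases h : lookupA es k <;> simp [gfold, tailsAt, h]
  | cons p rest ih =>
    have hstep : gfold (p :: rest) es = gfold rest (gstep es p) := rfl
    rw [hstep, ih]
    cases p with
    | nil =>
      have h1 : gstep es [] = es := rfl
      have h2 : tailsAt k ([] :: rest) = tailsAt k rest := by simp [tailsAt]
      rw [h1, h2]
    | cons h t =>
      have htails : tailsAt k ((h :: t) :: rest) =
          if h = k then t :: tailsAt k rest else tailsAt k rest := by
        by_cases hh : h = k <;> simp [tailsAt, List.filterMap_cons, hh]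
      have hga : lookupA (gstep es (h :: t)) k =
          if k = h then some ((lookupA es h).getD [] ++ [t]) else lookupA es k :=
        lookupA_addTail es h t k
      rw [htails, hga]
      by_cases hk : k = h
      · subst hk
        rw [if_pos rfl, if_pos rfl]
        cases hl : lookupA es k with
        | none => simp [hl]
        | some v => simp [hl]
      · have hhk : ¬ h = k := fun he => hk he.symm
        rw [if_neg hk, if_neg hhk]

theorem getD_groupB (l : List (List String)) (k : String) :
    PySem.Dict.getD (groupB l) k [] = tailsAt k l := by
  have hitems := (groupB_items l).1
  have hlk := lookupA_gfold l [] k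
  have hnil : lookupA [] k = none := rfl
  rw [hnil] at hlk
  have hD : PySem.Dict.getD (groupB l) k [] = (lookupA (gfold l []) k).getD [] := by
    rw [← hitems]
    rfl
  rw [hD, hlk]
  by_cases ht : tailsAt k l = []
  · simp [ht]
  · simp [ht]

theorem lookupA_of_mem (es : List (String × List (List String))) (k : String) (ts : List (List String))
    (hnd : keysND es) (h : (k, ts) ∈ es) : lookupA es k = some ts := by
  induction es with
  | nil => cases h
  | cons kt rest ih =>
    rcases List.mem_cons.mp h with he | hm
    · rw [← he]
      exact lookupA_cons_eq _ _ _ rfl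
    · have hkmem : k ∈ rest.map Prod.fst := List.mem_map.mpr ⟨(k, ts), hm, rfl⟩
      have hk : kt.1 ≠ k := fun hkk => (List.nodup_cons.mp hnd).1 (hkk ▸ hkmem)
      rw [lookupA_cons_ne _ _ _ hk]
      exact ih (List.nodup_cons.mp hnd).2 hm

theorem mem_gfold (l : List (List String)) (k : String) (ts : List (List String))
    (h : (k, ts) ∈ gfold l []) : ts = tailsAt k l ∧ ts ≠ [] := by
  have hnd := (groupB_items l).2
  have hlk := lookupA_of_mem _ _ _ hnd h
  rw [lookupA_gfold l [] k] at hlk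
  have hnil : lookupA [] k = none := rfl
  rw [hnil] at hlk
  by_cases ht : tailsAt k l = []
  · rw [if_pos ht] at hlk; cases hlk
  · rw [if_neg ht] at hlk
    exact ⟨(Option.some_inj.mp hlk).symm, fun he => ht ((Option.some_inj.mp hlk) ▸ he ▸ rfl)⟩

theorem mem_tailsAt (k : String) (l : List (List String)) (x : List String) :
    x ∈ tailsAt k l ↔ (k :: x) ∈ l := by
  constructor
  · intro hx
    obtain ⟨p, hp, hpe⟩ := List.mem_filterMap.mp hx
    cases p with
    | nil => simp at hpe
    | cons h t =>
      simp only at hpe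
      split at hpe
      · rename_i hh
        cases hpe
        exact hh ▸ hp
      · cases hpe
  · intro hm
    exact List.mem_filterMap.mpr ⟨k :: x, hm, by simp⟩

theorem tailsAt_head (k : String) (l : List (List String)) (h : tailsAt k l ≠ []) :
    ∃ p ∈ l, ∃ t, p = k :: t := by
  cases ht : tailsAt k l with
  | nil => exact absurd ht h
  | cons x xs =>
    have : x ∈ tailsAt k l := ht ▸ List.mem_cons_self ..
    exact ⟨k :: x, (mem_tailsAt k l x).mp this, x, rfl⟩

theorem tailsAt_dff (k : String) (l : List (List String)) (h : DFF l) : DFF (tailsAt k l) := by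
  intro p hp
  have := (mem_tailsAt k l p).mp hp
  intro x hx
  exact h _ this x (List.mem_cons_of_mem _ hx)

def forestOf (ps : List (List String)) : Forest := ps.foldl Forest.insertPath .nil

def chainF (es : List (String × List (List String))) : Forest :=
  es.foldr (fun kt rest => Forest.cons kt.1 (forestOf kt.2) rest) .nil

theorem forestOf_snoc (ts : List (List String)) (t : List String) :
    forestOf (ts ++ [t]) = Forest.insertPath (forestOf ts) t := by
  simp [forestOf, List.foldl_append]

theorem insertPath_chain (es : List (String × List (List String))) (p : List String) :
    Forest.insertPath (chainF es) p = chainF (gstep es p) := by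
  have hnilp : ∀ f, Forest.insertPath f [] = f := by
    intro f; cases f <;> rw [Forest.insertPath]
  cases p with
  | nil => rw [hnilp]; rfl
  | cons h t =>
    induction es with
    | nil =>
      show Forest.insertPath Forest.nil (h :: t) = chainF [(h, [t])]
      simp [Forest.insertPath, chainF, forestOf]
    | cons kt rest ih =>
      obtain ⟨k, ts⟩ := kt
      show Forest.insertPath (Forest.cons k (forestOf ts) (chainF rest)) (h :: t) = _
      rw [Forest.insertPath]
      by_cases hk : k = h
      · rw [if_pos (by simpa using hk)]
        have : addTail ((k, ts) :: rest) h t = (k, ts ++ [t]) :: rest := by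
          simp [addTail, hk]
        simp only [gstep, this]
        show _ = Forest.cons k (forestOf (ts ++ [t])) (chainF rest)
        rw [forestOf_snoc]
      · rw [if_neg (by simpa using hk)]
        have : addTail ((k, ts) :: rest) h t = (k, ts) :: addTail rest h t := by
          simp [addTail, hk]
        simp only [gstep, this] at ih ⊢
        show Forest.cons k (forestOf ts) (Forest.insertPath (chainF rest) (h :: t)) = _
        rw [ih]
        rfl

theorem foldl_insertPath_chain (l : List (List String)) (es : List (String × List (List String))) :
    l.foldl Forest.insertPath (chainF es) = chainF (gfold l es) := by
  induction l generalizing es with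
  | nil => rfl
  | cons p rest ih =>
    simp only [List.foldl_cons, insertPath_chain]
    exact ih (gstep es p)

theorem buildNested_eq (perms : List String) :
    buildNested perms = chainF (gfold (perms.map segsA) []) := by
  unfold buildNested
  rw [← List.foldl_map (f := segsA) (g := Forest.insertPath)]
  exact foldl_insertPath_chain (perms.map segsA) []

theorem forestOf_eq_chain (ps : List (List String)) : forestOf ps = chainF (gfold ps []) :=
  foldl_insertPath_chain ps []

theorem get?_chain (es : List (String × List (List String))) (k : String) :
    Forest.get? (chainF es) k = (lookupA es k).map forestOf := by
  induction es with
  | nil => rfl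
  | cons kt rest ih =>
    show Forest.get? (Forest.cons kt.1 (forestOf kt.2) (chainF rest)) k = _
    rw [Forest.get?]
    by_cases hk : kt.1 = k
    · rw [if_pos (by simpa using hk), lookupA_cons_eq _ _ _ hk]
      rfl
    · rw [if_neg (by simpa using hk), lookupA_cons_ne _ _ _ hk]
      exact ih

theorem get?_user (us : List (List String)) (k : String) :
    Forest.get? (chainF (gfold us [])) k =
      if tailsAt k us = [] then none else some (forestOf (tailsAt k us)) := by
  rw [get?_chain, lookupA_gfold us [] k]
  have hnil : lookupA [] k = none := rfl
  rw [hnil]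
  by_cases ht : tailsAt k us = []
  · simp [ht]
  · simp [ht]

theorem guard_get? (uF : Forest) (k : String) :
    (if uF = Forest.nil then none else uF.get? k) = uF.get? k := by
  cases uF with
  | nil => simp [Forest.get?]
  | cons a b c => rw [if_neg (by simp)]

theorem reduceA_none (f : Forest) (pl res : List String) :
    reduceA f none pl res = (false, res) := by
  cases f <;> rw [reduceA]

theorem reduceA_leaf (u : Forest) (pl res : List String) :
    reduceA Forest.nil (some u) pl res = (true, res ++ [PySem.Str.join "." pl]) := by
  rw [reduceA]

theorem reduceA_node (k : String) (c rest : Forest) (u : Forest) (pl res : List String) :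
    reduceA (Forest.cons k c rest) (some u) pl res =
      (let st := reduceChildren (Forest.cons k c rest) u pl true res
       if st.1 then
         (true, (st.2.filter fun r => !(PySem.Str.startswith r (PySem.Str.join "." pl ++ "."))) ++
                [PySem.Str.join "." pl ++ ".*"])
       else (false, st.2)) := by
  rw [reduceA]

theorem reduceChildren_nil (uF : Forest) (pl : List String) (acc : Bool) (res : List String) :
    reduceChildren Forest.nil uF pl acc res = (acc, res) := by
  rw [reduceChildren]

theorem reduceChildren_cons (k : String) (c rest : Forest) (uF : Forest) (pl : List String)
    (acc : Bool) (res : List String) :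
    reduceChildren (Forest.cons k c rest) uF pl acc res =
      (let r := reduceA c (if uF = Forest.nil then none else uF.get? k) (pl ++ [k]) res
       reduceChildren rest uF pl (acc && r.1) r.2) := by
  rw [reduceChildren]

theorem recB_eq (alls users : List (List String)) (path : String) :
    recB alls users path =
      (if users = [] then (false, [])
       else if (groupB alls).items.isEmpty then (true, [path])
       else
         let st := recBGo (W alls) (groupB alls).items (fun kt hkt => groupB_W_lt alls kt hkt)
                     (groupB users) path (true, [])
         if st.1 then (true, [path ++ ".*"]) else (false, st.2)) := by
  rw [recB]

theorem recBGo_nil (n : Nat) (h : ∀ kt ∈ ([] : List (String × List (List String))), W kt.2 < n)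
    (gu : PySem.Dict String (List (List String))) (path : String) (st : Bool × List String) :
    recBGo n [] h gu path st = st := by
  rw [recBGo]

theorem recBGo_cons (n : Nat) (kt : String × List (List String))
    (rest : List (String × List (List String))) (h : ∀ x ∈ kt :: rest, W x.2 < n)
    (gu : PySem.Dict String (List (List String))) (path : String) (st : Bool × List String) :
    recBGo n (kt :: rest) h gu path st =
      (let r := recB kt.2 (PySem.Dict.getD gu kt.1 []) (path ++ "." ++ kt.1)
       recBGo n rest (fun x hx => h x (List.mem_cons_of_mem _ hx)) gu path
         (st.1 && r.1, st.2 ++ r.2)) := by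
  rw [recBGo]

def MainP (alls users : List (List String)) (pl res : List String) : Prop :=
  DFF alls → DFF users → DF pl → pl ≠ [] →
  (∀ r ∈ res, ¬ ((jC pl ++ ['.']) <+: r.toList)) →
  (reduceA (forestOf alls) (if users = [] then none else some (forestOf users)) pl res =
      ((recB alls users (PySem.Str.join "." pl)).1,
        res ++ (recB alls users (PySem.Str.join "." pl)).2)) ∧
  (∀ x ∈ (recB alls users (PySem.Str.join "." pl)).2,
      ∃ e : List String, DF e ∧ x.toList = jC (pl ++ e)) ∧
  (recB alls users (PySem.Str.join "." pl)).2.Nodup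

theorem inner_loop (n : Nat)
    (IH : ∀ alls' users' pl' res', W alls' ≤ n → MainP alls' users' pl' res')
    (users : List (List String)) (pl : List String)
    (husers : DFF users) (hpl : DF pl) (hplne : pl ≠ []) :
    ∀ (entries : List (String × List (List String))) (m : Nat)
      (hm : ∀ kt ∈ entries, W kt.2 < m)
      (hWn : ∀ kt ∈ entries, W kt.2 ≤ n)
      (hent : ∀ kt ∈ entries, '.' ∉ kt.1.toList ∧ DFF kt.2)
      (hndk : (entries.map Prod.fst).Nodup)
      (acc : Bool) (res outAcc : List String)
      (hres : ∀ r ∈ res, ¬ ((jC pl ++ ['.']) <+: r.toList))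
      (hout : ∀ x ∈ outAcc, ∃ k e, '.' ∉ k.toList ∧ DF e ∧ x.toList = jC (pl ++ k :: e) ∧
        ∀ kt ∈ entries, kt.1 ≠ k)
      (houtnd : outAcc.Nodup),
      reduceChildren (chainF entries) (forestOf users) pl acc (res ++ outAcc) =
        ((recBGo m entries hm (groupB users) (PySem.Str.join "." pl) (acc, outAcc)).1,
         res ++ (recBGo m entries hm (groupB users) (PySem.Str.join "." pl) (acc, outAcc)).2) ∧
      (∀ x ∈ (recBGo m entries hm (groupB users) (PySem.Str.join "." pl) (acc, outAcc)).2,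
          ∃ k e, '.' ∉ k.toList ∧ DF e ∧ x.toList = jC (pl ++ k :: e)) ∧
      (recBGo m entries hm (groupB users) (PySem.Str.join "." pl) (acc, outAcc)).2.Nodup := by
  intro entries
  induction entries with
  | nil =>
    intro m hm hWn hent hndk acc res outAcc hres hout houtnd
    rw [recBGo_nil]
    refine ⟨?_, ?_, houtnd⟩
    · rw [show chainF [] = Forest.nil from rfl, reduceChildren_nil]
    · intro x hx
      obtain ⟨k, e, hk, he, hxe, -⟩ := hout x hx
      exact ⟨k, e, hk, he, hxe⟩
  | cons kt rest ih =>
    intro m hm hWn hent hndk acc res outAcc hres hout houtnd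
    have hchain : chainF (kt :: rest) = Forest.cons kt.1 (forestOf kt.2) (chainF rest) := rfl
    have hget : (forestOf users).get? kt.1 =
        (if tailsAt kt.1 users = [] then none else some (forestOf (tailsAt kt.1 users))) := by
      rw [forestOf_eq_chain]; exact get?_user users kt.1
    have hpath : PySem.Str.join "." pl ++ "." ++ kt.1 = PySem.Str.join "." (pl ++ [kt.1]) :=
      (SJ_snoc pl kt.1 hplne).symm
    have hgd : PySem.Dict.getD (groupB users) kt.1 [] = tailsAt kt.1 users := getD_groupB users kt.1
    have hkdot : '.' ∉ kt.1.toList := (hent kt (List.mem_cons_self ..)).1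
    have hresC : ∀ r ∈ res ++ outAcc, ¬ ((jC (pl ++ [kt.1]) ++ ['.']) <+: r.toList) := by
      intro r hr
      rcases List.mem_append.mp hr with hr | hr
      · exact nonprefix_mono pl kt.1 r.toList hplne (hres r hr)
      · obtain ⟨k, e, hk, he, hxe, hne⟩ := hout r hr
        rw [hxe]
        exact sib_nonprefix pl k kt.1 e hk hkdot
          (fun hkk => hne kt (List.mem_cons_self ..) hkk.symm)
    have hM := IH kt.2 (tailsAt kt.1 users) (pl ++ [kt.1]) (res ++ outAcc)
      (hWn kt (List.mem_cons_self ..))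
      (hent kt (List.mem_cons_self ..)).2 (tailsAt_dff kt.1 users husers)
      (by
        intro x hx
        rcases List.mem_append.mp hx with hx | hx
        · exact hpl x hx
        · rw [List.mem_singleton.mp hx]; exact hkdot)
      (by simp) hresC
    obtain ⟨hMeq, hMsh, hMnd⟩ := hM
    rw [hchain, reduceChildren_cons, recBGo_cons]
    simp only [guard_get?]
    simp only [hget, hpath, hgd]
    simp only [hMeq]
    have hassoc : res ++ outAcc ++ (recB kt.2 (tailsAt kt.1 users) (PySem.Str.join "." (pl ++ [kt.1]))).2 =
        res ++ (outAcc ++ (recB kt.2 (tailsAt kt.1 users) (PySem.Str.join "." (pl ++ [kt.1]))).2) := by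
      simp
    rw [hassoc]
    apply ih
    · intro x hx
      exact hWn x (List.mem_cons_of_mem _ hx)
    · intro x hx
      exact hent x (List.mem_cons_of_mem _ hx)
    · exact (List.nodup_cons.mp hndk).2
    · exact hres
    · intro x hx
      rcases List.mem_append.mp hx with hx | hx
      · obtain ⟨k, e, hk, he, hxe, hne⟩ := hout x hx
        exact ⟨k, e, hk, he, hxe, fun kt' hkt' => hne kt' (List.mem_cons_of_mem _ hkt')⟩
      · obtain ⟨e, he, hxe⟩ := hMsh x hx
        refine ⟨kt.1, e, hkdot, he, by simpa using hxe, ?_⟩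
        intro kt' hkt' hkk
        exact (List.nodup_cons.mp hndk).1 (hkk ▸ List.mem_map_of_mem hkt')
    · rw [List.nodup_append]
      refine ⟨houtnd, hMnd, ?_⟩
      intro x hx y hy
      obtain ⟨k, e, hk, he, hxe, hne⟩ := hout x hx
      obtain ⟨e', he', hye⟩ := hMsh y hy
      intro hxy
      subst hxy
      have : jC (pl ++ k :: e) = jC (pl ++ kt.1 :: e') := by
        rw [← hxe, hye]; simp
      exact sib_ne pl k kt.1 e e' hk hkdot
        (fun hkk => hne kt (List.mem_cons_self ..) hkk.symm) this

theorem startswith_toList (r q : String) :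
    PySem.Str.startswith r q = PySem.Chars.startswith r.toList q.toList :=
  PySem.Str.startswith_eq r q

theorem dotstr_toList (pl : List String) :
    (PySem.Str.join "." pl ++ ".").toList = jC pl ++ ['.'] := by
  rw [String.toList_append, SJ_toList]
  rfl

theorem keep_of_nonprefix (pl : List String) (r : String)
    (h : ¬ ((jC pl ++ ['.']) <+: r.toList)) :
    (!(PySem.Str.startswith r (PySem.Str.join "." pl ++ "."))) = true := by
  rw [startswith_toList, dotstr_toList]
  cases hsw : PySem.Chars.startswith r.toList (jC pl ++ ['.']) with
  | false => rfl
  | true => exact absurd ((PySem.Chars.startswith_iff _ _).mp hsw) h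

theorem drop_of_prefix (pl : List String) (x : String)
    (h : (jC pl ++ ['.']) <+: x.toList) :
    (!(PySem.Str.startswith x (PySem.Str.join "." pl ++ "."))) = false := by
  rw [startswith_toList, dotstr_toList]
  rw [(PySem.Chars.startswith_iff x.toList (jC pl ++ ['.'])).mpr h]
  rfl

theorem star_toList (pl : List String) (hpl : pl ≠ []) :
    (PySem.Str.join "." pl ++ ".*").toList = jC (pl ++ ["*"]) := by
  rw [String.toList_append, SJ_toList, jC_snoc pl "*" hpl]
  rfl

theorem main_corr : ∀ (n : Nat) (alls users : List (List String)) (pl res : List String),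
    W alls ≤ n → MainP alls users pl res := by
  intro n
  induction n using Nat.strong_induction_on with
  | _ n IH =>
    intro alls users pl res hWn
    intro hDalls hDusers hDpl hplne hres
    by_cases hu : users = []
    · subst hu
      rw [if_pos rfl, reduceA_none, recB_eq, if_pos rfl]
      simp
    · rw [if_neg hu]
      have hfa : forestOf alls = chainF (gfold alls []) := forestOf_eq_chain alls
      have hitems : (groupB alls).items = gfold alls [] := (groupB_items alls).1
      cases hes : gfold alls [] with
      | nil =>
        rw [hfa, hes, show chainF [] = Forest.nil from rfl, reduceA_leaf, recB_eq, if_neg hu,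
          if_pos (show ((groupB alls).items.isEmpty = true) by rw [hitems, hes]; rfl)]
        refine ⟨rfl, ?_, List.nodup_singleton _⟩
        intro x hx
        rw [List.mem_singleton.mp hx]
        exact ⟨[], by simp [DF], by rw [SJ_toList]; simp⟩
      | cons kt0 rest0 =>
        have hmem0 : kt0 ∈ (groupB alls).items := by
          rw [hitems, hes]; exact List.mem_cons_self ..
        have hW1 : 1 ≤ W alls := by
          have := groupB_W_lt alls kt0 hmem0
          omega
        have hIH' : ∀ alls' users' pl' res', W alls' ≤ W alls - 1 → MainP alls' users' pl' res' := by
          intro a' u' p' r' hW'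
          exact IH (W alls - 1) (by omega) a' u' p' r' hW'
        have hentP : ∀ kt ∈ (groupB alls).items, '.' ∉ kt.1.toList ∧ DFF kt.2 := by
          intro kt hkt
          obtain ⟨k, ts⟩ := kt
          have hmg := mem_gfold alls k ts (hitems ▸ hkt)
          obtain ⟨p, hp, t, hpt⟩ := tailsAt_head k alls (hmg.1 ▸ hmg.2)
          refine ⟨?_, ?_⟩
          · have := hDalls p hp
            rw [hpt] at this
            exact this k (List.mem_cons_self ..)
          · rw [hmg.1]
            exact tailsAt_dff k alls hDalls
        have hinner := inner_loop (W alls - 1) hIH' users pl hDusers hDpl hplne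
          (groupB alls).items (W alls)
          (fun kt hkt => groupB_W_lt alls kt hkt)
          (by
            intro kt hkt
            have := groupB_W_lt alls kt hkt
            omega)
          hentP (by rw [hitems]; exact (groupB_items alls).2) true res []
          hres (by simp) (by simp)
        obtain ⟨hIeq, hIsh, hInd⟩ := hinner
        simp only [List.append_nil] at hIeq
        have hchainit : chainF (groupB alls).items = Forest.cons kt0.1 (forestOf kt0.2) (chainF rest0) := by
          rw [hitems, hes]
          rfl
        have hforest : forestOf alls = Forest.cons kt0.1 (forestOf kt0.2) (chainF rest0) := by
          rw [hfa, ← hitems, hchainit]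
        rw [hchainit] at hIeq
        rw [recB_eq, if_neg hu,
          if_neg (show ¬((groupB alls).items.isEmpty = true) by rw [hitems, hes]; simp)]
        rw [hforest, reduceA_node]
        simp only [hIeq]
        cases hb : (recBGo (W alls) (groupB alls).items (fun kt hkt => groupB_W_lt alls kt hkt)
            (groupB users) (PySem.Str.join "." pl) (true, [])).1 with
        | false =>
          simp only [Bool.false_eq_true, if_false]
          refine ⟨trivial, ?_, hInd⟩
          intro x hx
          obtain ⟨k, e, hk, he, hxe⟩ := hIsh x hx
          refine ⟨k :: e, ?_, hxe⟩
          intro z hz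
          rcases List.mem_cons.mp hz with rfl | hz
          · exact hk
          · exact he z hz
        | true =>
          simp only [if_true]
          have hfil : (res ++ (recBGo (W alls) (groupB alls).items
              (fun kt hkt => groupB_W_lt alls kt hkt) (groupB users)
              (PySem.Str.join "." pl) (true, [])).2).filter
                (fun r => !(PySem.Str.startswith r (PySem.Str.join "." pl ++ "."))) = res := by
            rw [List.filter_append]
            have h1 : res.filter (fun r => !(PySem.Str.startswith r (PySem.Str.join "." pl ++ "."))) = res := by
              apply List.filter_eq_self.mpr
              intro r hr
              exact keep_of_nonprefix pl r (hres r hr)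
            have h2 : ((recBGo (W alls) (groupB alls).items
                (fun kt hkt => groupB_W_lt alls kt hkt) (groupB users)
                (PySem.Str.join "." pl) (true, [])).2).filter
                  (fun r => !(PySem.Str.startswith r (PySem.Str.join "." pl ++ "."))) = [] := by
              apply List.filter_eq_nil_iff.mpr
              intro x hx
              obtain ⟨k, e, hk, he, hxe⟩ := hIsh x hx
              rw [drop_of_prefix pl x (hxe ▸ child_prefix pl k e hplne)]
              simp
            rw [h1, h2, List.append_nil]
          rw [hfil]
          refine ⟨rfl, ?_, List.nodup_singleton _⟩
          intro x hx
          rw [List.mem_singleton.mp hx]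
          refine ⟨["*"], by simp [DF], star_toList pl hplne⟩

theorem top_loop (users : List (List String)) (husers : DFF users) :
    ∀ (entries : List (String × List (List String)))
      (hent : ∀ kt ∈ entries, '.' ∉ kt.1.toList ∧ DFF kt.2)
      (hndk : (entries.map Prod.fst).Nodup)
      (outAcc : List String)
      (hout : ∀ x ∈ outAcc, ∃ k e, '.' ∉ k.toList ∧ DF e ∧ x.toList = jC (k :: e) ∧
        ∀ kt ∈ entries, kt.1 ≠ k)
      (houtnd : outAcc.Nodup),
      collapseLoop (chainF entries) (forestOf users) outAcc =
        entries.foldl (fun out kt =>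
          out ++ (recB kt.2 (PySem.Dict.getD (groupB users) kt.1 []) kt.1).2) outAcc
      ∧ (∀ x ∈ entries.foldl (fun out kt =>
            out ++ (recB kt.2 (PySem.Dict.getD (groupB users) kt.1 []) kt.1).2) outAcc,
          ∃ k e, '.' ∉ k.toList ∧ DF e ∧ x.toList = jC (k :: e))
      ∧ (entries.foldl (fun out kt =>
          out ++ (recB kt.2 (PySem.Dict.getD (groupB users) kt.1 []) kt.1).2) outAcc).Nodup := by
  intro entries
  induction entries with
  | nil =>
    intro hent hndk outAcc hout houtnd
    refine ⟨rfl, ?_, houtnd⟩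
    intro x hx
    obtain ⟨k, e, hk, he, hxe, -⟩ := hout x hx
    exact ⟨k, e, hk, he, hxe⟩
  | cons kt rest ih =>
    intro hent hndk outAcc hout houtnd
    have hkdot : '.' ∉ kt.1.toList := (hent kt (List.mem_cons_self ..)).1
    have hchain : chainF (kt :: rest) = Forest.cons kt.1 (forestOf kt.2) (chainF rest) := rfl
    have hstep : collapseLoop (chainF (kt :: rest)) (forestOf users) outAcc =
        collapseLoop (chainF rest) (forestOf users)
          (reduceA (forestOf kt.2) ((forestOf users).get? kt.1) [kt.1] outAcc).2 := by
      rw [hchain]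
      rfl
    have hget : (forestOf users).get? kt.1 =
        (if tailsAt kt.1 users = [] then none else some (forestOf (tailsAt kt.1 users))) := by
      rw [forestOf_eq_chain]; exact get?_user users kt.1
    have hres0 : ∀ r ∈ outAcc, ¬ ((jC [kt.1] ++ ['.']) <+: r.toList) := by
      intro r hr
      obtain ⟨k, e, hk, he, hxe, hne⟩ := hout r hr
      rw [hxe]
      have := sib_nonprefix [] k kt.1 e hk hkdot
        (fun hkk => hne kt (List.mem_cons_self ..) hkk.symm)
      simpa using this
    have hM := main_corr (W kt.2) kt.2 (tailsAt kt.1 users) [kt.1] outAcc (Nat.le_refl _)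
      (hent kt (List.mem_cons_self ..)).2 (tailsAt_dff kt.1 users husers)
      (by intro x hx; rw [List.mem_singleton.mp hx]; exact hkdot)
      (by simp) hres0
    obtain ⟨hMeq, hMsh, hMnd⟩ := hM
    rw [SJ_single] at hMeq hMsh hMnd
    rw [hstep, hget, hMeq]
    have hB : (kt :: rest).foldl (fun out kt =>
        out ++ (recB kt.2 (PySem.Dict.getD (groupB users) kt.1 []) kt.1).2) outAcc =
        rest.foldl (fun out kt =>
          out ++ (recB kt.2 (PySem.Dict.getD (groupB users) kt.1 []) kt.1).2)
          (outAcc ++ (recB kt.2 (tailsAt kt.1 users) kt.1).2) := by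
      rw [List.foldl_cons, getD_groupB]
    rw [hB]
    apply ih
    · intro x hx; exact hent x (List.mem_cons_of_mem _ hx)
    · exact (List.nodup_cons.mp hndk).2
    · intro x hx
      rcases List.mem_append.mp hx with hx | hx
      · obtain ⟨k, e, hk, he, hxe, hne⟩ := hout x hx
        exact ⟨k, e, hk, he, hxe, fun kt' hkt' => hne kt' (List.mem_cons_of_mem _ hkt')⟩
      · obtain ⟨e, he, hxe⟩ := hMsh x hx
        refine ⟨kt.1, e, hkdot, he, by simpa using hxe, ?_⟩
        intro kt' hkt' hkk
        exact (List.nodup_cons.mp hndk).1 (hkk ▸ List.mem_map_of_mem hkt')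
    · rw [List.nodup_append]
      refine ⟨houtnd, hMnd, ?_⟩
      intro x hx y hy
      obtain ⟨k, e, hk, he, hxe, hne⟩ := hout x hx
      obtain ⟨e', he', hye⟩ := hMsh y hy
      intro hxy
      subst hxy
      have heq : jC ([] ++ k :: e) = jC ([] ++ kt.1 :: e') := by
        rw [List.nil_append, List.nil_append, ← hxe, hye]
        simp
      exact sib_ne [] k kt.1 e e' hk hkdot
        (fun hkk => hne kt (List.mem_cons_self ..) hkk.symm) heq

-- ---------- the common declarative spec: leaves, coverage, owned nodes, maximal owned nodes ----------

/-- some permission path has a non-empty segment list -/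
def NEP (alls : List (List String)) : Prop := ∃ q ∈ alls, q ≠ []

/-- r is a leaf: a maximal (non-extendable) non-empty prefix of the permission set -/
def RLeaf (alls : List (List String)) (r : List String) : Prop :=
  r ≠ [] ∧ (∃ q ∈ alls, r <+: q) ∧ ∀ q ∈ alls, r <+: q → q = r

/-- the user set reaches (at least) down to node r -/
def RCov (users : List (List String)) (r : List String) : Prop := ∃ v ∈ users, r <+: v

/-- node r exists and every leaf below it is covered by the user -/
def ROwnN (alls users : List (List String)) (r : List String) : Prop :=
  (∃ q ∈ alls, r <+: q) ∧ ∀ ℓ, RLeaf alls ℓ → r <+: ℓ → RCov users ℓ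

/-- r is owned and no proper non-empty prefix of r is owned -/
def RMax (alls users : List (List String)) (r : List String) : Prop :=
  r ≠ [] ∧ ROwnN alls users r ∧ ∀ j, 0 < j → j < r.length → ¬ ROwnN alls users (r.take j)

/-- the whole (sub)tree is owned -/
def ROwnAll (alls users : List (List String)) : Prop :=
  users ≠ [] ∧ ∀ ℓ, RLeaf alls ℓ → RCov users ℓ

/-- x is the rendering of node r over base string `base` (no star for a leaf) -/
def Rend (alls : List (List String)) (base : String) (r : List String) (x : String) : Prop :=
  (RLeaf alls r ∧ x = base) ∨ (¬ RLeaf alls r ∧ x = base ++ ".*")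

/-- declarative description of recB's output list -/
def RS (alls users : List (List String)) (path x : String) : Prop :=
  users ≠ [] ∧
  ((¬ NEP alls ∧ x = path)
   ∨ (NEP alls ∧ ROwnAll alls users ∧ x = path ++ ".*")
   ∨ (NEP alls ∧ ¬ ROwnAll alls users ∧
        ∃ r, RMax alls users r ∧ Rend alls (path ++ "." ++ PySem.Str.join "." r) r x))

/-- declarative description of the whole collapsed output set -/
def SpecOut (alls users : List (List String)) (x : String) : Prop :=
  ∃ r, RMax alls users r ∧ Rend alls (PySem.Str.join "." r) r x

-- ---------- basic facts ----------

theorem SJ_cons (k : String) (r : List String) (hr : r ≠ []) :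
    PySem.Str.join "." (k :: r) = k ++ "." ++ PySem.Str.join "." r := by
  cases r with
  | nil => exact absurd rfl hr
  | cons b t =>
    rw [← String.toList_inj, SJ_toList, jC_cons₂, String.toList_append, String.toList_append,
      SJ_toList]
    show k.toList ++ '.' :: jC (b :: t) = k.toList ++ ("." : String).toList ++ jC (b :: t)
    simp

theorem splitAux_ne_nil : ∀ (l cur : List Char), splitAux l cur ≠ [] := by
  intro l
  induction l with
  | nil => intro cur; simp [splitAux]
  | cons c rest ih =>
    intro cur
    by_cases hc : c = '.'
    · simp [splitAux, hc]
    · simp only [splitAux, if_neg hc]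
      exact ih _

theorem segsA_ne_nil (s : String) : segsA s ≠ [] := by
  intro hx
  unfold segsA PySem.Str.split? PySem.Chars.split? at hx
  rw [if_neg (by simp)] at hx
  simp only [Option.map_some, Option.getD_some, List.map_eq_nil_iff] at hx
  have : ("." : String).toList = ['.'] := rfl
  rw [this, splitOn_eq] at hx
  exact splitAux_ne_nil _ _ hx

theorem noleaf_of_not_NEP (alls : List (List String)) (h : ¬ NEP alls) (ℓ : List String) :
    ¬ RLeaf alls ℓ := by
  rintro ⟨hne, ⟨q, hq, hpre⟩, -⟩
  refine h ⟨q, hq, ?_⟩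
  intro hq0
  subst hq0
  exact hne (List.prefix_nil.mp hpre)

theorem leaf_mem (alls : List (List String)) (ℓ : List String) (h : RLeaf alls ℓ) : ℓ ∈ alls := by
  obtain ⟨hne, ⟨q, hq, hpre⟩, hmax⟩ := h
  exact (hmax q hq hpre) ▸ hq

theorem exists_max_len (l : List (List String)) (h : l ≠ []) :
    ∃ q ∈ l, ∀ q' ∈ l, q'.length ≤ q.length := by
  induction l with
  | nil => exact absurd rfl h
  | cons a t ih =>
    cases t with
    | nil => exact ⟨a, List.mem_cons_self .., by intro q' hq'; rw [List.mem_singleton.mp hq']⟩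
    | cons b t' =>
      obtain ⟨q, hq, hmax⟩ := ih (by simp)
      by_cases hle : a.length ≤ q.length
      · refine ⟨q, List.mem_cons_of_mem _ hq, ?_⟩
        intro q' hq'
        rcases List.mem_cons.mp hq' with rfl | hq'
        · exact hle
        · exact hmax q' hq'
      · refine ⟨a, List.mem_cons_self .., ?_⟩
        intro q' hq'
        rcases List.mem_cons.mp hq' with rfl | hq'
        · exact le_rfl
        · exact le_trans (hmax q' hq') (by omega)

theorem exists_leaf_above (alls : List (List String)) (r : List String)
    (h : ∃ q ∈ alls, r <+: q ∧ q ≠ []) : ∃ ℓ, RLeaf alls ℓ ∧ r <+: ℓ := by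
  obtain ⟨q0, hq0, hq0p, hq0ne⟩ := h
  have hq0C : q0 ∈ alls.filter (fun q => decide (r <+: q)) :=
    List.mem_filter.mpr ⟨hq0, by simpa using hq0p⟩
  obtain ⟨q1, hq1C, hq1max⟩ := exists_max_len _ (List.ne_nil_of_mem hq0C)
  have hq1 : q1 ∈ alls := (List.mem_filter.mp hq1C).1
  have hq1p : r <+: q1 := by simpa using (List.mem_filter.mp hq1C).2
  have hq1ne : q1 ≠ [] := by
    intro he
    have := hq1max q0 hq0C
    rw [he] at this
    simp only [List.length_nil, Nat.le_zero, List.length_eq_zero_iff] at this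
    exact hq0ne this
  refine ⟨q1, ⟨hq1ne, ⟨q1, hq1, List.prefix_rfl⟩, ?_⟩, hq1p⟩
  intro q hq hpre
  have hqC : q ∈ alls.filter (fun q => decide (r <+: q)) :=
    List.mem_filter.mpr ⟨hq, by simpa using hq1p.trans hpre⟩
  exact (hpre.eq_of_length_le (hq1max q hqC)).symm

theorem gfold_mem_iff (l : List (List String)) (k : String) (ts : List (List String)) :
    (k, ts) ∈ gfold l [] ↔ tailsAt k l ≠ [] ∧ ts = tailsAt k l := by
  constructor
  · intro h
    have := mem_gfold l k ts h
    exact ⟨this.1 ▸ this.2, this.1⟩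
  · rintro ⟨hne, rfl⟩
    have hlk : lookupA (gfold l []) k = some (tailsAt k l) := by
      rw [lookupA_gfold l [] k]
      simp only [show lookupA [] k = none from rfl]
      rw [if_neg hne]
    unfold lookupA at hlk
    cases hf : (gfold l []).find? (fun p => p.1 == k) with
    | none => rw [hf] at hlk; cases hlk
    | some p =>
      rw [hf] at hlk
      have hp1 : p.1 = k := by
        have := List.find?_some hf
        simpa using this
      have hp2 : p.2 = tailsAt k l := by simpa using hlk
      have hpm := List.mem_of_find?_eq_some hf
      have : (k, tailsAt k l) = p := by
        obtain ⟨p1, p2⟩ := p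
        simp at hp1 hp2
        rw [hp1, hp2]
      rw [this]
      exact hpm

theorem gfold_nil_iff (l : List (List String)) : gfold l [] = [] ↔ ¬ NEP l := by
  constructor
  · intro hnil hNEP
    obtain ⟨q, hq, hqne⟩ := hNEP
    cases q with
    | nil => exact hqne rfl
    | cons h t =>
      have ht : t ∈ tailsAt h l := (mem_tailsAt h l t).mpr hq
      have : (h, tailsAt h l) ∈ gfold l [] :=
        (gfold_mem_iff l h (tailsAt h l)).mpr ⟨List.ne_nil_of_mem ht, rfl⟩
      rw [hnil] at this
      cases this
  · intro hN
    have hall : ∀ p ∈ l, p = [] := by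
      intro p hp
      by_contra hne
      exact hN ⟨p, hp, hne⟩
    have haux : ∀ (ll : List (List String)), (∀ p ∈ ll, p = []) →
        ∀ (es : List (String × List (List String))), gfold ll es = es := by
      intro ll
      induction ll with
      | nil => intro _ es; rfl
      | cons p rest ih =>
        intro hall' es
        have hp : p = [] := hall' p (List.mem_cons_self ..)
        have hstep : gfold (p :: rest) es = gfold rest (gstep es p) := rfl
        rw [hstep, hp]
        exact ih (fun q hq => hall' q (List.mem_cons_of_mem _ hq)) es
    exact haux l hall []

-- ---------- one-level transfer lemmas (node at k::s in alls ↔ node at s in the k-tails) ----------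

theorem node_cons (alls : List (List String)) (k : String) (s : List String) :
    (∃ q ∈ alls, (k :: s) <+: q) ↔ ∃ t ∈ tailsAt k alls, s <+: t := by
  constructor
  · rintro ⟨v, hv, hpre⟩
    cases v with
    | nil => cases (List.prefix_nil.mp hpre)
    | cons b m =>
      obtain ⟨hb, hsm⟩ := List.cons_prefix_cons.mp hpre
      exact ⟨m, (mem_tailsAt k alls m).mpr (hb ▸ hv), hsm⟩
  · rintro ⟨t, ht, hst⟩
    exact ⟨k :: t, (mem_tailsAt k alls t).mp ht, List.cons_prefix_cons.mpr ⟨rfl, hst⟩⟩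

theorem leaf_cons (alls : List (List String)) (k : String) (s : List String) (hs : s ≠ []) :
    RLeaf alls (k :: s) ↔ RLeaf (tailsAt k alls) s := by
  constructor
  · rintro ⟨-, hex, hmax⟩
    refine ⟨hs, (node_cons alls k s).mp hex, ?_⟩
    intro t ht hst
    have := hmax (k :: t) ((mem_tailsAt k alls t).mp ht) (List.cons_prefix_cons.mpr ⟨rfl, hst⟩)
    exact (List.cons.injEq .. ▸ this).2
  · rintro ⟨-, hex, hmax⟩
    refine ⟨by simp, (node_cons alls k s).mpr hex, ?_⟩
    intro q hq hpre
    cases q with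
    | nil => cases (List.prefix_nil.mp hpre)
    | cons b m =>
      obtain ⟨hb, hsm⟩ := List.cons_prefix_cons.mp hpre
      subst hb
      rw [hmax m ((mem_tailsAt k alls m).mpr hq) hsm]

theorem leaf_single (alls : List (List String)) (k : String) :
    RLeaf alls [k] ↔ tailsAt k alls ≠ [] ∧ ∀ t ∈ tailsAt k alls, t = [] := by
  constructor
  · rintro ⟨-, ⟨q, hq, hpre⟩, hmax⟩
    cases q with
    | nil => cases (List.prefix_nil.mp hpre)
    | cons b m =>
      obtain ⟨hb, -⟩ := List.cons_prefix_cons.mp hpre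
      subst hb
      refine ⟨List.ne_nil_of_mem ((mem_tailsAt k alls m).mpr hq), ?_⟩
      intro t ht
      have := hmax (k :: t) ((mem_tailsAt k alls t).mp ht)
        (List.cons_prefix_cons.mpr ⟨rfl, List.nil_prefix⟩)
      exact (List.cons.injEq .. ▸ this).2
  · rintro ⟨hne, hall⟩
    cases ht : tailsAt k alls with
    | nil => exact absurd ht hne
    | cons t ts =>
      have htm : t ∈ tailsAt k alls := ht ▸ List.mem_cons_self ..
      refine ⟨by simp, ⟨k :: t, (mem_tailsAt k alls t).mp htm,
        List.cons_prefix_cons.mpr ⟨rfl, List.nil_prefix⟩⟩, ?_⟩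
      intro q hq hpre
      cases q with
      | nil => cases (List.prefix_nil.mp hpre)
      | cons b m =>
        obtain ⟨hb, -⟩ := List.cons_prefix_cons.mp hpre
        subst hb
        rw [hall m ((mem_tailsAt k alls m).mpr hq)]

theorem cov_cons (users : List (List String)) (k : String) (s : List String) :
    RCov users (k :: s) ↔ RCov (tailsAt k users) s := by
  exact node_cons users k s

theorem cov_nil (users : List (List String)) : RCov users [] ↔ users ≠ [] := by
  constructor
  · rintro ⟨v, hv, -⟩
    exact List.ne_nil_of_mem hv
  · intro h
    cases users with
    | nil => exact absurd rfl h
    | cons v t => exact ⟨v, List.mem_cons_self .., List.nil_prefix⟩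

theorem own_cons (alls users : List (List String)) (k : String) (s : List String)
    (h : s ≠ [] ∨ NEP (tailsAt k alls)) :
    ROwnN alls users (k :: s) ↔ ROwnN (tailsAt k alls) (tailsAt k users) s := by
  constructor
  · rintro ⟨hex, hcov⟩
    refine ⟨(node_cons alls k s).mp hex, ?_⟩
    intro m hm hsm
    have hmne : m ≠ [] := hm.1
    have : RLeaf alls (k :: m) := (leaf_cons alls k m hmne).mpr hm
    have := hcov (k :: m) this (List.cons_prefix_cons.mpr ⟨rfl, hsm⟩)
    exact (cov_cons users k m).mp this
  · rintro ⟨hex, hcov⟩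
    refine ⟨(node_cons alls k s).mpr hex, ?_⟩
    intro ℓ hℓ hpre
    cases ℓ with
    | nil => cases (List.prefix_nil.mp hpre)
    | cons b m =>
      obtain ⟨hb, hsm⟩ := List.cons_prefix_cons.mp hpre
      subst hb
      cases hmn : m with
      | nil =>
        subst hmn
        have hs0 : s = [] := List.prefix_nil.mp hsm
        rcases h with hs | hNE
        · exact absurd hs0 hs
        · exfalso
          obtain ⟨t, ht, htne⟩ := hNE
          have := ((leaf_single alls k).mp hℓ).2 t ht
          exact htne this
      | cons c m' =>
        subst hmn
        have := (leaf_cons alls k (c :: m') (by simp)).mp hℓ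
        have hc := hcov (c :: m') this hsm
        exact (cov_cons users k (c :: m')).mpr hc

theorem ownAll_iff (alls users : List (List String)) (h : NEP alls) :
    ROwnAll alls users ↔ ROwnN alls users [] := by
  constructor
  · rintro ⟨hu, hcov⟩
    obtain ⟨q, hq, -⟩ := h
    exact ⟨⟨q, hq, List.nil_prefix⟩, fun ℓ hℓ _ => hcov ℓ hℓ⟩
  · rintro ⟨-, hcov⟩
    obtain ⟨q, hq, hqne⟩ := h
    obtain ⟨ℓ, hℓ, -⟩ := exists_leaf_above alls [] ⟨q, hq, List.nil_prefix, hqne⟩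
    obtain ⟨v, hv, -⟩ := hcov ℓ hℓ List.nil_prefix
    exact ⟨List.ne_nil_of_mem hv, fun ℓ' hℓ' => hcov ℓ' hℓ' List.nil_prefix⟩

theorem max_single (alls users : List (List String)) (k : String) :
    RMax alls users [k] ↔ ROwnN alls users [k] := by
  unfold RMax
  constructor
  · rintro ⟨-, h, -⟩; exact h
  · intro h
    refine ⟨by simp, h, ?_⟩
    intro j hj0 hj1
    simp at hj1
    omega

theorem max_cons (alls users : List (List String)) (k : String) (s : List String) (hs : s ≠ []) :
    RMax alls users (k :: s) ↔
      ¬ ROwnN alls users [k] ∧ RMax (tailsAt k alls) (tailsAt k users) s := by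
  unfold RMax
  have htake1 : (k :: s).take 1 = [k] := by simp
  constructor
  · rintro ⟨-, hown, hmin⟩
    have hlen : 1 < (k :: s).length := by
      simp
      exact List.length_pos_of_ne_nil hs
    refine ⟨htake1 ▸ hmin 1 (by omega) hlen, hs, (own_cons alls users k s (Or.inl hs)).mp hown, ?_⟩
    intro i hi0 hilen
    have hit : (k :: s).take (i + 1) = k :: s.take i := by simp
    have hne : s.take i ≠ [] := by
      have : (s.take i).length = i := by
        rw [List.length_take]
        omega
      intro he
      rw [he] at this
      simp at this
      omega
    intro hcon
    exact hmin (i + 1) (by omega) (by simp; omega)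
      (hit ▸ (own_cons alls users k (s.take i) (Or.inl hne)).mpr hcon)
  · rintro ⟨hk1, -, hown, hmin⟩
    refine ⟨by simp, (own_cons alls users k s (Or.inl hs)).mpr hown, ?_⟩
    intro j hj0 hjlen
    cases j with
    | zero => omega
    | succ i =>
      cases i with
      | zero => rw [htake1]; exact hk1
      | succ i' =>
        have hit : (k :: s).take (i' + 1 + 1) = k :: s.take (i' + 1) := by simp
        have hilen : i' + 1 < s.length := by simp at hjlen; omega
        have hne : s.take (i' + 1) ≠ [] := by
          have : (s.take (i' + 1)).length = i' + 1 := by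
            rw [List.length_take]
            omega
          intro he
          rw [he] at this
          simp at this
        rw [hit]
        intro hcon
        exact hmin (i' + 1) (by omega) hilen
          ((own_cons alls users k (s.take (i' + 1)) (Or.inl hne)).mp hcon)

-- ---------- recB computes the spec ----------

theorem recBGo_closed (n : Nat) (gu : PySem.Dict String (List (List String))) (path : String) :
    ∀ (entries : List (String × List (List String))) (h : ∀ kt ∈ entries, W kt.2 < n)
      (b : Bool) (out : List String),
      recBGo n entries h gu path (b, out) =
        (b && entries.all (fun kt => (recB kt.2 (PySem.Dict.getD gu kt.1 []) (path ++ "." ++ kt.1)).1),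
         out ++ entries.flatMap (fun kt => (recB kt.2 (PySem.Dict.getD gu kt.1 []) (path ++ "." ++ kt.1)).2)) := by
  intro entries
  induction entries with
  | nil =>
    intro h b out
    rw [recBGo_nil]
    simp
  | cons kt rest ih =>
    intro h b out
    rw [recBGo_cons]
    simp only []
    rw [ih]
    simp [Bool.and_assoc]

theorem allch_iff (alls users : List (List String)) (hne : NEP alls) :
    (∀ kt ∈ gfold alls [], ROwnAll kt.2 (tailsAt kt.1 users)) ↔ ROwnAll alls users := by
  constructor
  · intro hch
    have hgne : gfold alls [] ≠ [] := by
      intro he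
      exact ((gfold_nil_iff alls).mp he) hne
    obtain ⟨kt0, hkt0⟩ := List.exists_mem_of_ne_nil _ hgne
    have hu : users ≠ [] := by
      obtain ⟨hu0, -⟩ := hch kt0 hkt0
      cases ht : tailsAt kt0.1 users with
      | nil => exact absurd ht hu0
      | cons v t =>
        have : v ∈ tailsAt kt0.1 users := ht ▸ List.mem_cons_self ..
        exact List.ne_nil_of_mem ((mem_tailsAt kt0.1 users v).mp this)
    refine ⟨hu, ?_⟩
    intro ℓ hℓ
    have hℓne := hℓ.1
    obtain ⟨q, hq, hpre⟩ := hℓ.2.1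
    cases ℓ with
    | nil => exact absurd rfl hℓne
    | cons k m =>
      have hq' : q.tail ∈ tailsAt k alls := by
        cases q with
        | nil => cases (List.prefix_nil.mp hpre)
        | cons b t =>
          obtain ⟨hb, -⟩ := List.cons_prefix_cons.mp hpre
          subst hb
          exact (mem_tailsAt k alls t).mpr hq
      have hts : tailsAt k alls ≠ [] := List.ne_nil_of_mem hq'
      have hktm : (k, tailsAt k alls) ∈ gfold alls [] :=
        (gfold_mem_iff alls k _).mpr ⟨hts, rfl⟩
      obtain ⟨hu0, hcov⟩ := hch (k, tailsAt k alls) hktm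
      cases m with
      | nil =>
        exact (cov_cons users k []).mpr ((cov_nil _).mpr hu0)
      | cons c m' =>
        have hlf : RLeaf (tailsAt k alls) (c :: m') :=
          (leaf_cons alls k (c :: m') (by simp)).mp hℓ
        exact (cov_cons users k (c :: m')).mpr (hcov _ hlf)
  · rintro ⟨hu, hcov⟩ kt hkt
    obtain ⟨hts, hts2⟩ := (gfold_mem_iff alls kt.1 kt.2).mp hkt
    obtain ⟨t0, ht0⟩ := List.exists_mem_of_ne_nil _ hts
    have hq0 : (kt.1 :: t0) ∈ alls := (mem_tailsAt kt.1 alls t0).mp ht0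
    obtain ⟨ℓ, hℓ, hkℓ⟩ := exists_leaf_above alls [kt.1]
      ⟨kt.1 :: t0, hq0, List.cons_prefix_cons.mpr ⟨rfl, List.nil_prefix⟩, by simp⟩
    have hℓcov := hcov ℓ hℓ
    have hℓk : ∃ m, ℓ = kt.1 :: m := by
      cases ℓ with
      | nil => cases (List.prefix_nil.mp hkℓ)
      | cons b m =>
        obtain ⟨hb, -⟩ := List.cons_prefix_cons.mp hkℓ
        exact ⟨m, by rw [hb]⟩
    obtain ⟨m, rfl⟩ := hℓk
    have htus : tailsAt kt.1 users ≠ [] := by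
      obtain ⟨m', hm', -⟩ := (cov_cons users kt.1 m).mp hℓcov
      exact List.ne_nil_of_mem hm'
    rw [hts2]
    refine ⟨htus, ?_⟩
    intro m' hm'
    have hm'ne : m' ≠ [] := hm'.1
    have : RLeaf alls (kt.1 :: m') := (leaf_cons alls kt.1 m' hm'ne).mpr hm'
    exact (cov_cons users kt.1 m').mp (hcov _ this)

theorem recB_fst : ∀ (n : Nat) (alls : List (List String)), W alls ≤ n →
    ∀ (users : List (List String)) (path : String),
      ((recB alls users path).1 = true ↔ ROwnAll alls users) := by
  intro n
  induction n using Nat.strong_induction_on with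
  | _ n IH =>
    intro alls hW users path
    rw [recB_eq]
    by_cases hu : users = []
    · rw [if_pos hu]
      simp [ROwnAll, hu]
    · rw [if_neg hu]
      by_cases hie : (groupB alls).items.isEmpty = true
      · rw [if_pos hie]
        have hnil : gfold alls [] = [] := by
          rw [← (groupB_items alls).1]
          exact List.isEmpty_iff.mp hie
        have hN : ¬ NEP alls := (gfold_nil_iff alls).mp hnil
        constructor
        · intro _
          exact ⟨hu, fun ℓ hℓ => absurd hℓ (noleaf_of_not_NEP alls hN ℓ)⟩
        · exact fun _ => rfl
      · rw [if_neg hie]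
        have hitems : (groupB alls).items = gfold alls [] := (groupB_items alls).1
        have hne : NEP alls := by
          by_contra hN
          exact hie (by rw [hitems, (gfold_nil_iff alls).mpr hN]; rfl)
        rw [recBGo_closed]
        have hfst : ∀ (st : Bool × List String),
            ((if st.1 then ((true : Bool), [path ++ ".*"]) else ((false : Bool), st.2)).1 = true
              ↔ st.1 = true) := by
          intro st
          cases h : st.1 <;> simp [h]
        rw [hfst]
        simp only [Bool.true_and, List.all_eq_true]
        constructor
        · intro h
          refine (allch_iff alls users hne).mp ?_
          intro kt hkt
          have hh := h kt (by rw [hitems]; exact hkt)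
          rw [getD_groupB] at hh
          have hWkt : W kt.2 < n :=
            lt_of_lt_of_le (groupB_W_lt alls kt (by rw [hitems]; exact hkt)) hW
          exact (IH (W kt.2) hWkt kt.2 le_rfl (tailsAt kt.1 users) (path ++ "." ++ kt.1)).mp hh
        · intro h kt hkt
          have hch := (allch_iff alls users hne).mpr h kt (by rw [← hitems]; exact hkt)
          rw [getD_groupB]
          have hWkt : W kt.2 < n :=
            lt_of_lt_of_le (groupB_W_lt alls kt hkt) hW
          exact (IH (W kt.2) hWkt kt.2 le_rfl (tailsAt kt.1 users) (path ++ "." ++ kt.1)).mpr hch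

theorem step_mem (alls users : List (List String)) (x : String)
    (pf : String → String) (J : List String → String)
    (hJ1 : ∀ k, J [k] = pf k)
    (hJ2 : ∀ k s, s ≠ [] → J (k :: s) = pf k ++ "." ++ PySem.Str.join "." s) :
    (∃ kt ∈ gfold alls [], RS kt.2 (tailsAt kt.1 users) (pf kt.1) x)
      ↔ ∃ r, RMax alls users r ∧ Rend alls (J r) r x := by
  constructor
  · rintro ⟨kt, hkt, hRS⟩
    obtain ⟨k, ts⟩ := kt
    obtain ⟨hts, rfl⟩ := (gfold_mem_iff alls k ts).mp hkt
    have hu0 : tailsAt k users ≠ [] := hRS.1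
    have hnodek : ∃ q ∈ alls, [k] <+: q := by
      obtain ⟨p, hp, t, hpt⟩ := tailsAt_head k alls hts
      exact ⟨p, hp, by rw [hpt]; exact List.cons_prefix_cons.mpr ⟨rfl, List.nil_prefix⟩⟩
    rcases hRS.2 with ⟨hnN, hx⟩ | ⟨hN, hall, hx⟩ | ⟨hN, hnall, s, hsmax, hrend⟩
    · -- the k-subtree is a single leaf
      have hallnil : ∀ t ∈ tailsAt k alls, t = [] := by simpa [NEP] using hnN
      have hleafk : RLeaf alls [k] := (leaf_single alls k).mpr ⟨hts, hallnil⟩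
      have hown : ROwnN alls users [k] := by
        refine ⟨hnodek, ?_⟩
        intro ℓ hℓ hpre
        cases ℓ with
        | nil => exact absurd (List.prefix_nil.mp hpre) (by simp)
        | cons b m =>
          obtain ⟨hb, -⟩ := List.cons_prefix_cons.mp hpre
          subst hb
          cases m with
          | nil => exact (cov_cons users k []).mpr ((cov_nil _).mpr hu0)
          | cons c m' =>
            exfalso
            obtain ⟨-, ⟨t, ht, hpt⟩, -⟩ := (leaf_cons alls k (c :: m') (by simp)).mp hℓ
            have := hallnil t ht
            subst this
            exact absurd (List.prefix_nil.mp hpt) (by simp)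
      refine ⟨[k], (max_single alls users k).mpr hown, Or.inl ⟨hleafk, ?_⟩⟩
      rw [hJ1]
      exact hx
    · -- the whole k-subtree is owned
      have hownk : ROwnN alls users [k] :=
        (own_cons alls users k [] (Or.inr hN)).mpr ((ownAll_iff _ _ hN).mp hall)
      have hnleaf : ¬ RLeaf alls [k] := by
        intro hlf
        obtain ⟨-, hallnil⟩ := (leaf_single alls k).mp hlf
        obtain ⟨t, ht, htne⟩ := hN
        exact htne (hallnil t ht)
      exact ⟨[k], (max_single alls users k).mpr hownk,
        Or.inr ⟨hnleaf, by rw [hJ1]; exact hx⟩⟩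
    · -- a maximal node strictly inside the k-subtree
      have hsne : s ≠ [] := hsmax.1
      have hnk : ¬ ROwnN alls users [k] := by
        intro hk
        exact hnall ((ownAll_iff _ _ hN).mpr ((own_cons alls users k [] (Or.inr hN)).mp hk))
      refine ⟨k :: s, (max_cons alls users k s hsne).mpr ⟨hnk, hsmax⟩, ?_⟩
      rcases hrend with ⟨hlf, hx⟩ | ⟨hnlf, hx⟩
      · exact Or.inl ⟨(leaf_cons alls k s hsne).mpr hlf, by rw [hJ2 k s hsne]; exact hx⟩
      · exact Or.inr ⟨fun hc => hnlf ((leaf_cons alls k s hsne).mp hc),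
          by rw [hJ2 k s hsne]; exact hx⟩
  · rintro ⟨r, hrmax, hrend⟩
    cases r with
    | nil => exact absurd rfl hrmax.1
    | cons k s =>
      have hrown := hrmax.2.1
      have hts : tailsAt k alls ≠ [] := by
        obtain ⟨q, hq, hpre⟩ := hrown.1
        cases q with
        | nil => exact absurd (List.prefix_nil.mp hpre) (by simp)
        | cons b t =>
          obtain ⟨hb, -⟩ := List.cons_prefix_cons.mp hpre
          subst hb
          exact List.ne_nil_of_mem ((mem_tailsAt k alls t).mpr hq)
      have hkt : (k, tailsAt k alls) ∈ gfold alls [] :=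
        (gfold_mem_iff alls k _).mpr ⟨hts, rfl⟩
      have htus : tailsAt k users ≠ [] := by
        obtain ⟨q, hq, hpre⟩ := hrown.1
        have hqne : q ≠ [] := by
          intro he
          rw [he] at hpre
          exact absurd (List.prefix_nil.mp hpre) (by simp)
        obtain ⟨ℓ, hℓ, hrl⟩ := exists_leaf_above alls (k :: s) ⟨q, hq, hpre, hqne⟩
        have hcovl := hrown.2 ℓ hℓ hrl
        cases ℓ with
        | nil => exact absurd (List.prefix_nil.mp hrl) (by simp)
        | cons b m =>
          obtain ⟨hb, -⟩ := List.cons_prefix_cons.mp hrl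
          subst hb
          obtain ⟨v, hv, -⟩ := (cov_cons users k m).mp hcovl
          exact List.ne_nil_of_mem hv
      refine ⟨(k, tailsAt k alls), hkt, htus, ?_⟩
      cases s with
      | nil =>
        have hownk : ROwnN alls users [k] := hrown
        by_cases hNE : NEP (tailsAt k alls)
        · have hnlf : ¬ RLeaf alls [k] := by
            intro hlf
            obtain ⟨-, hallnil⟩ := (leaf_single alls k).mp hlf
            obtain ⟨t, ht, htne⟩ := hNE
            exact htne (hallnil t ht)
          refine Or.inr (Or.inl ⟨hNE,
            (ownAll_iff _ _ hNE).mpr ((own_cons alls users k [] (Or.inr hNE)).mp hownk), ?_⟩)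
          rcases hrend with ⟨hlf, -⟩ | ⟨-, hx⟩
          · exact absurd hlf hnlf
          · rw [hJ1] at hx
            exact hx
        · have hallnil : ∀ t ∈ tailsAt k alls, t = [] := by simpa [NEP] using hNE
          have hlf : RLeaf alls [k] := (leaf_single alls k).mpr ⟨hts, hallnil⟩
          refine Or.inl ⟨hNE, ?_⟩
          rcases hrend with ⟨-, hx⟩ | ⟨hnlf, -⟩
          · rw [hJ1] at hx
            exact hx
          · exact absurd hlf hnlf
      | cons c s' =>
        obtain ⟨hnk, hsmax⟩ := (max_cons alls users k (c :: s') (by simp)).mp hrmax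
        have hNE : NEP (tailsAt k alls) := by
          obtain ⟨t, ht, hpt⟩ := hsmax.2.1.1
          refine ⟨t, ht, ?_⟩
          intro he
          rw [he] at hpt
          exact absurd (List.prefix_nil.mp hpt) (by simp)
        have hnall : ¬ ROwnAll (tailsAt k alls) (tailsAt k users) := fun hc =>
          hnk ((own_cons alls users k [] (Or.inr hNE)).mpr ((ownAll_iff _ _ hNE).mp hc))
        refine Or.inr (Or.inr ⟨hNE, hnall, c :: s', hsmax, ?_⟩)
        rcases hrend with ⟨hlf, hx⟩ | ⟨hnlf, hx⟩
        · exact Or.inl ⟨(leaf_cons alls k (c :: s') (by simp)).mp hlf,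
            by rw [hJ2 k (c :: s') (by simp)] at hx; exact hx⟩
        · exact Or.inr ⟨fun hc => hnlf ((leaf_cons alls k (c :: s') (by simp)).mpr hc),
            by rw [hJ2 k (c :: s') (by simp)] at hx; exact hx⟩

theorem recB_mem : ∀ (n : Nat) (alls : List (List String)), W alls ≤ n →
    ∀ (users : List (List String)) (path : String) (x : String),
      (x ∈ (recB alls users path).2 ↔ RS alls users path x) := by
  intro n
  induction n using Nat.strong_induction_on with
  | _ n IH =>
    intro alls hW users path x
    rw [recB_eq]
    by_cases hu : users = []
    · rw [if_pos hu]
      constructor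
      · intro h
        exact absurd h (by simp)
      · intro hRS
        exact absurd hu hRS.1
    · rw [if_neg hu]
      by_cases hie : (groupB alls).items.isEmpty = true
      · rw [if_pos hie]
        have hnil : gfold alls [] = [] := by
          rw [← (groupB_items alls).1]
          exact List.isEmpty_iff.mp hie
        have hN : ¬ NEP alls := (gfold_nil_iff alls).mp hnil
        constructor
        · intro h
          exact ⟨hu, Or.inl ⟨hN, List.mem_singleton.mp h⟩⟩
        · intro hRS
          rcases hRS.2 with ⟨-, hx⟩ | ⟨hN', -, -⟩ | ⟨hN', -, -⟩
          · exact List.mem_singleton.mpr hx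
          · exact absurd hN' hN
          · exact absurd hN' hN
      · rw [if_neg hie]
        have hitems : (groupB alls).items = gfold alls [] := (groupB_items alls).1
        have hne : NEP alls := by
          by_contra hN
          exact hie (by rw [hitems, (gfold_nil_iff alls).mpr hN]; rfl)
        rw [recBGo_closed]
        simp only [Bool.true_and]
        have hJ1 : ∀ k : String,
            path ++ "." ++ PySem.Str.join "." [k] = path ++ "." ++ k := by
          intro k
          rw [SJ_single]
        have hJ2 : ∀ (k : String) (s : List String), s ≠ [] →
            path ++ "." ++ PySem.Str.join "." (k :: s) =
            (path ++ "." ++ k) ++ "." ++ PySem.Str.join "." s := by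
          intro k s hs
          rw [SJ_cons k s hs]
          simp [String.append_assoc]
        by_cases hall : ROwnAll alls users
        · have hb : ((groupB alls).items.all (fun kt =>
              (recB kt.2 (PySem.Dict.getD (groupB users) kt.1 []) (path ++ "." ++ kt.1)).1)) = true := by
            rw [List.all_eq_true]
            intro kt hkt
            rw [getD_groupB]
            exact (recB_fst (W kt.2) kt.2 le_rfl _ _).mpr
              ((allch_iff alls users hne).mpr hall kt (by rw [← hitems]; exact hkt))
          rw [if_pos hb]
          constructor
          · intro h
            exact ⟨hu, Or.inr (Or.inl ⟨hne, hall, List.mem_singleton.mp h⟩)⟩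
          · intro hRS
            rcases hRS.2 with ⟨hN', -⟩ | ⟨-, -, hx⟩ | ⟨-, hnall, -⟩
            · exact absurd hne hN'
            · exact List.mem_singleton.mpr hx
            · exact absurd hall hnall
        · have hb : ¬ (((groupB alls).items.all (fun kt =>
              (recB kt.2 (PySem.Dict.getD (groupB users) kt.1 []) (path ++ "." ++ kt.1)).1)) = true) := by
            intro hb
            apply hall
            apply (allch_iff alls users hne).mp
            intro kt hkt
            have := List.all_eq_true.mp hb kt (by rw [hitems]; exact hkt)
            rw [getD_groupB] at this
            exact (recB_fst (W kt.2) kt.2 le_rfl _ _).mp this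
          rw [if_neg hb]
          simp only [List.nil_append, List.mem_flatMap]
          constructor
          · rintro ⟨kt, hkt, hx⟩
            have hkt' : kt ∈ gfold alls [] := by rw [← hitems]; exact hkt
            have hWkt : W kt.2 < n := lt_of_lt_of_le (groupB_W_lt alls kt hkt) hW
            rw [getD_groupB] at hx
            have hRS := (IH (W kt.2) hWkt kt.2 le_rfl (tailsAt kt.1 users)
              (path ++ "." ++ kt.1) x).mp hx
            obtain ⟨r, hrmax, hrend⟩ :=
              (step_mem alls users x (fun k => path ++ "." ++ k)
                (fun r => path ++ "." ++ PySem.Str.join "." r)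
                (fun k => hJ1 k) (fun k s hs => hJ2 k s hs)).mp ⟨kt, hkt', hRS⟩
            exact ⟨hu, Or.inr (Or.inr ⟨hne, hall, r, hrmax, hrend⟩)⟩
          · intro hRS
            rcases hRS.2 with ⟨hN', -⟩ | ⟨-, hall', -⟩ | ⟨-, -, r, hrmax, hrend⟩
            · exact absurd hne hN'
            · exact absurd hall' hall
            · obtain ⟨kt, hkt', hRSc⟩ :=
                (step_mem alls users x (fun k => path ++ "." ++ k)
                  (fun r => path ++ "." ++ PySem.Str.join "." r)
                  (fun k => hJ1 k) (fun k s hs => hJ2 k s hs)).mpr ⟨r, hrmax, hrend⟩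
              have hkt : kt ∈ (groupB alls).items := by rw [hitems]; exact hkt'
              have hWkt : W kt.2 < n := lt_of_lt_of_le (groupB_W_lt alls kt hkt) hW
              refine ⟨kt, hkt, ?_⟩
              rw [getD_groupB]
              exact (IH (W kt.2) hWkt kt.2 le_rfl (tailsAt kt.1 users)
                (path ++ "." ++ kt.1) x).mpr hRSc

theorem top_mem (UL AL : List (List String)) (x : String) :
    (x ∈ (gfold AL []).flatMap (fun kt => (recB kt.2 (tailsAt kt.1 UL) kt.1).2))
      ↔ SpecOut AL UL x := by
  rw [List.mem_flatMap]
  constructor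
  · rintro ⟨kt, hkt, hx⟩
    have hRS := (recB_mem (W kt.2) kt.2 le_rfl (tailsAt kt.1 UL) kt.1 x).mp hx
    exact (step_mem AL UL x (fun k => k) (fun r => PySem.Str.join "." r)
      (fun k => SJ_single k) (fun k s hs => SJ_cons k s hs)).mp ⟨kt, hkt, hRS⟩
  · intro hS
    obtain ⟨kt, hkt, hRSc⟩ :=
      (step_mem AL UL x (fun k => k) (fun r => PySem.Str.join "." r)
        (fun k => SJ_single k) (fun k s hs => SJ_cons k s hs)).mpr hS
    exact ⟨kt, hkt, (recB_mem (W kt.2) kt.2 le_rfl (tailsAt kt.1 UL) kt.1 x).mpr hRSc⟩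

-- ---------- the B port computes the spec ----------

theorem mem_foldl_add {α β : Type} [BEq β] [LawfulBEq β] (f : α → β) :
    ∀ (l : List α) (s : PySem.Set β) (x : β),
      (x ∈ l.foldl (fun s y => PySem.Set.add s (f y)) s ↔ x ∈ s ∨ ∃ y ∈ l, x = f y) := by
  intro l
  induction l with
  | nil =>
    intro s x
    simp
  | cons y t ih =>
    intro s x
    rw [List.foldl_cons, ih, PySem.Set.mem_add]
    simp only [List.exists_mem_cons_iff]
    tauto

theorem nodup_foldl_add {α β : Type} [BEq β] [LawfulBEq β] (f : α → β) :
    ∀ (l : List α) (s : PySem.Set β), s.Nodup →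
      (l.foldl (fun s y => PySem.Set.add s (f y)) s).Nodup := by
  intro l
  induction l with
  | nil => intro s h; exact h
  | cons y t ih =>
    intro s h
    rw [List.foldl_cons]
    exact ih _ (PySem.Set.nodup_add s (f y) h)

-- proof-side names for the let-bound values of the B port
def alltD (a : List String) : PySem.Set (List String) := PySem.Set.ofList (a.map segsB)
def strictD (a : List String) : PySem.Set (List String) :=
  PySem.Set.ofList ((alltD a).flatMap (fun q =>
    (PySem.List.pyRange 1 (q.length : Int) 1).map (fun k => PySem.List.slice q none (some k))))
def leavesD (a : List String) : PySem.Set (List String) := PySem.Set.diff (alltD a) (strictD a)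
def userprefD (u : List String) : PySem.Set (List String) :=
  PySem.Set.ofList (u.flatMap (fun s =>
    (PySem.List.pyRange 0 ((segsB s).length + 1 : Int) 1).map (fun k => PySem.List.slice (segsB s) none (some k))))
def coveredD (u a : List String) : PySem.Set (List String) :=
  PySem.Set.ofList ((leavesD a).filter (fun l => PySem.Set.contains (userprefD u) l))
def badD (u a : List String) : PySem.Set (List String) :=
  PySem.Set.ofList ((PySem.Set.diff (leavesD a) (coveredD u a)).flatMap (fun l =>
    (PySem.List.pyRange 1 ((l.length : Int) + 1) 1).map (fun k => PySem.List.slice l none (some k))))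
def bodyD (u a : List String) (l : List String) : String :=
  if whileK (badD u a) l (l.length + 1) 1 = (l.length : Int) then
    PySem.Str.join "." (PySem.List.slice l none (some (whileK (badD u a) l (l.length + 1) 1)))
  else
    PySem.Str.join "." (PySem.List.slice l none (some (whileK (badD u a) l (l.length + 1) 1))) ++ ".*"
def outD (u a : List String) : PySem.Set String :=
  (coveredD u a).foldl (fun out l => PySem.Set.add out (bodyD u a l)) PySem.Set.empty

theorem segsBA : segsB = segsA := rfl

theorem alt_eq (u a : List String)
    (hc : ¬ PySem.Set.equal (PySem.Set.ofList u) (PySem.Set.ofList a) = true) :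
    collapse_permissions_alt u a = PySem.List.sorted (outD u a) (fun x => x) false := by
  unfold collapse_permissions_alt
  rw [if_neg hc]
  rfl

theorem mem_alltD (a : List String) (x : List String) : x ∈ alltD a ↔ x ∈ a.map segsA := by
  unfold alltD
  rw [PySem.Set.mem_ofList, segsBA]

theorem mem_strictD (a : List String) (x : List String) :
    x ∈ strictD a ↔ ∃ q ∈ a.map segsA, x <+: q ∧ x ≠ [] ∧ x ≠ q := by
  unfold strictD
  rw [PySem.Set.mem_ofList, List.mem_flatMap]
  constructor
  · rintro ⟨q, hq, hx⟩
    have hq' : q ∈ a.map segsA := (mem_alltD a q).mp hq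
    obtain ⟨kk, hkk, rfl⟩ := List.mem_map.mp hx
    rw [PySem.List.mem_pyRange_one] at hkk
    rw [PySem.List.slice_to _ (by omega)]
    refine ⟨q, hq', List.take_prefix _ _, ?_, ?_⟩
    · have hlen : (List.take kk.toNat q).length = kk.toNat := by
        rw [List.length_take]
        omega
      intro he
      rw [he] at hlen
      simp at hlen
      omega
    · intro he
      have := congrArg List.length he
      rw [List.length_take] at this
      omega
  · rintro ⟨q, hq, hpre, hne, hneq⟩
    refine ⟨q, (mem_alltD a q).mpr hq, ?_⟩
    have hlt : x.length < q.length := by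
      by_contra h
      push_neg at h
      exact hneq (hpre.eq_of_length_le h)
    have hxpos : 0 < x.length := List.length_pos_of_ne_nil hne
    refine List.mem_map.mpr ⟨(x.length : Int), ?_, ?_⟩
    · rw [PySem.List.mem_pyRange_one]
      omega
    · rw [PySem.List.slice_to _ (by omega)]
      simp only [Int.toNat_natCast]
      exact (List.prefix_iff_eq_take.mp hpre).symm

theorem mem_leavesD (a : List String) (x : List String) :
    x ∈ leavesD a ↔ RLeaf (a.map segsA) x := by
  unfold leavesD
  rw [PySem.Set.mem_diff, mem_alltD, mem_strictD]
  constructor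
  · rintro ⟨hx, hns⟩
    have hxne : x ≠ [] := by
      obtain ⟨s, -, rfl⟩ := List.mem_map.mp hx
      exact segsA_ne_nil s
    refine ⟨hxne, ⟨x, hx, List.prefix_rfl⟩, ?_⟩
    intro q hq hpre
    by_contra hne
    exact hns ⟨q, hq, hpre, hxne, fun he => hne he.symm⟩
  · intro hlf
    refine ⟨leaf_mem _ _ hlf, ?_⟩
    rintro ⟨q, hq, hpre, -, hneq⟩
    exact hneq (hlf.2.2 q hq hpre).symm

theorem mem_userprefD (u : List String) (x : List String) :
    x ∈ userprefD u ↔ RCov (u.map segsA) x := by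
  unfold userprefD
  rw [PySem.Set.mem_ofList, List.mem_flatMap]
  constructor
  · rintro ⟨s, hs, hx⟩
    obtain ⟨kk, hkk, rfl⟩ := List.mem_map.mp hx
    rw [PySem.List.mem_pyRange_one] at hkk
    rw [PySem.List.slice_to _ (by omega)]
    rw [segsBA]
    exact ⟨segsA s, List.mem_map_of_mem hs, List.take_prefix _ _⟩
  · rintro ⟨v, hv, hpre⟩
    obtain ⟨s, hs, rfl⟩ := List.mem_map.mp hv
    refine ⟨s, hs, List.mem_map.mpr ⟨(x.length : Int), ?_, ?_⟩⟩
    · rw [PySem.List.mem_pyRange_one, segsBA]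
      have := hpre.length_le
      omega
    · rw [PySem.List.slice_to _ (by omega), segsBA]
      simp only [Int.toNat_natCast]
      exact (List.prefix_iff_eq_take.mp hpre).symm

theorem mem_coveredD (u a : List String) (x : List String) :
    x ∈ coveredD u a ↔ RLeaf (a.map segsA) x ∧ RCov (u.map segsA) x := by
  unfold coveredD
  rw [PySem.Set.mem_ofList, List.mem_filter, mem_leavesD]
  constructor
  · rintro ⟨hlf, hct⟩
    exact ⟨hlf, (mem_userprefD u x).mp ((PySem.Set.contains_iff _ _).mp hct)⟩
  · rintro ⟨hlf, hcov⟩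
    exact ⟨hlf, (PySem.Set.contains_iff _ _).mpr ((mem_userprefD u x).mpr hcov)⟩

theorem mem_badD (u a : List String) (x : List String) :
    x ∈ badD u a ↔
      ∃ ℓ, RLeaf (a.map segsA) ℓ ∧ ¬ RCov (u.map segsA) ℓ ∧ x ≠ [] ∧ x <+: ℓ := by
  unfold badD
  rw [PySem.Set.mem_ofList, List.mem_flatMap]
  constructor
  · rintro ⟨l, hl, hx⟩
    rw [PySem.Set.mem_diff, mem_leavesD] at hl
    obtain ⟨hlf, hnc⟩ := hl
    have hncov : ¬ RCov (u.map segsA) l := fun hc => hnc ((mem_coveredD u a l).mpr ⟨hlf, hc⟩)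
    obtain ⟨kk, hkk, rfl⟩ := List.mem_map.mp hx
    rw [PySem.List.mem_pyRange_one] at hkk
    rw [PySem.List.slice_to _ (by omega)]
    refine ⟨l, hlf, hncov, ?_, List.take_prefix _ _⟩
    have hlen : (List.take kk.toNat l).length = kk.toNat := by
      rw [List.length_take]
      omega
    intro he
    rw [he] at hlen
    simp at hlen
    omega
  · rintro ⟨ℓ, hlf, hncov, hxne, hpre⟩
    refine ⟨ℓ, ?_, ?_⟩
    · rw [PySem.Set.mem_diff, mem_leavesD]
      exact ⟨hlf, fun hc => hncov ((mem_coveredD u a ℓ).mp hc).2⟩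
    · refine List.mem_map.mpr ⟨(x.length : Int), ?_, ?_⟩
      · rw [PySem.List.mem_pyRange_one]
        have h1 := hpre.length_le
        have h2 := List.length_pos_of_ne_nil hxne
        omega
      · rw [PySem.List.slice_to _ (by omega)]
        simp only [Int.toNat_natCast]
        exact (List.prefix_iff_eq_take.mp hpre).symm

theorem not_bad_iff (u a : List String) (p : List String) (hp : p ≠ []) :
    p ∉ badD u a ↔ ∀ ℓ, RLeaf (a.map segsA) ℓ → p <+: ℓ → RCov (u.map segsA) ℓ := by
  constructor
  · intro hnb ℓ hlf hpre
    by_contra hnc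
    exact hnb ((mem_badD u a p).mpr ⟨ℓ, hlf, hnc, hp, hpre⟩)
  · intro hcov hmem
    obtain ⟨ℓ, hlf, hnc, -, hpre⟩ := (mem_badD u a p).mp hmem
    exact hnc (hcov ℓ hlf hpre)

theorem whileK_spec (bad : PySem.Set (List String)) (l : List String) :
    ∀ (fuel : Nat) (k m : Int), 1 ≤ k → k ≤ m →
      PySem.List.slice l none (some m) ∉ bad → ((m - k).toNat < fuel) →
      k ≤ whileK bad l fuel k ∧ whileK bad l fuel k ≤ m ∧
      PySem.List.slice l none (some (whileK bad l fuel k)) ∉ bad ∧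
      ∀ i : Int, k ≤ i → i < whileK bad l fuel k → PySem.List.slice l none (some i) ∈ bad := by
  intro fuel
  induction fuel with
  | zero =>
    intro k m hk hkm hm hf
    exact absurd hf (by omega)
  | succ fuel ih =>
    intro k m hk hkm hm hf
    by_cases hcon : PySem.Set.contains bad (PySem.List.slice l none (some k)) = true
    · rw [whileK, if_pos hcon]
      have hkm' : k < m := by
        rcases eq_or_lt_of_le hkm with he | h
        · exfalso
          rw [he] at hcon
          exact hm ((PySem.Set.contains_iff _ _).mp hcon)
        · exact h
      obtain ⟨h1, h2, h3, h4⟩ := ih (k + 1) m (by omega) (by omega) hm (by omega)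
      refine ⟨by omega, h2, h3, ?_⟩
      intro i hi1 hi2
      rcases eq_or_lt_of_le hi1 with rfl | h
      · exact (PySem.Set.contains_iff _ _).mp hcon
      · exact h4 i (by omega) hi2
    · rw [whileK, if_neg hcon]
      refine ⟨le_rfl, hkm, ?_, ?_⟩
      · intro hmem
        exact hcon ((PySem.Set.contains_iff _ _).mpr hmem)
      · intro i h1 h2
        omega

theorem outD_mem (u a : List String) (x : String) :
    x ∈ outD u a ↔ SpecOut (a.map segsA) (u.map segsA) x := by
  unfold outD
  rw [mem_foldl_add]
  simp only [show (PySem.Set.empty : PySem.Set String) = [] from rfl, List.not_mem_nil, false_or]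
  constructor
  · rintro ⟨l, hlmem, rfl⟩
    obtain ⟨hlf, hcov⟩ := (mem_coveredD u a l).mp hlmem
    have hlne : l ≠ [] := hlf.1
    have hlpos : 0 < l.length := List.length_pos_of_ne_nil hlne
    have hlnotbad : l ∉ badD u a := by
      rw [not_bad_iff u a l hlne]
      intro ℓ hℓ hpre
      have he : ℓ = l := hlf.2.2 ℓ (leaf_mem _ _ hℓ) hpre
      rw [he]
      exact hcov
    have hslice_m : PySem.List.slice l none (some (l.length : Int)) = l := by
      rw [PySem.List.slice_to _ (by omega)]
      simp
    obtain ⟨hj1, hjm, hjgood, hjbad⟩ := whileK_spec (badD u a) l (l.length + 1) 1 (l.length : Int)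
      (by omega) (by omega) (by rw [hslice_m]; exact hlnotbad) (by omega)
    set j := whileK (badD u a) l (l.length + 1) 1 with hjdef
    have hslice_j : PySem.List.slice l none (some j) = l.take j.toNat :=
      PySem.List.slice_to _ (by omega)
    have hptake : l.take j.toNat <+: l := List.take_prefix _ _
    have hplen : (l.take j.toNat).length = j.toNat := by
      rw [List.length_take]
      omega
    have hpne : l.take j.toNat ≠ [] := by
      intro he
      rw [he] at hplen
      simp at hplen
      omega
    have hown : ROwnN (a.map segsA) (u.map segsA) (l.take j.toNat) := by
      refine ⟨⟨l, leaf_mem _ _ hlf, hptake⟩, ?_⟩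
      rw [← not_bad_iff u a _ hpne, ← hslice_j]
      exact hjgood
    have hmin : ∀ i, 0 < i → i < (l.take j.toNat).length →
        ¬ ROwnN (a.map segsA) (u.map segsA) ((l.take j.toNat).take i) := by
      intro i hi0 hilen
      rw [hplen] at hilen
      have htt : (l.take j.toNat).take i = l.take i := by
        rw [List.take_take]
        congr 1
        omega
      rw [htt]
      have hibad : l.take i ∈ badD u a := by
        have hb := hjbad (i : Int) (by omega) (by omega)
        rw [PySem.List.slice_to _ (by omega)] at hb
        simpa using hb
      rintro ⟨-, hcv⟩
      have hineq : l.take i ≠ [] := by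
        have hl2 : (l.take i).length = i := by
          rw [List.length_take]
          omega
        intro he
        rw [he] at hl2
        simp at hl2
        omega
      exact ((not_bad_iff u a _ hineq).mpr hcv) hibad
    refine ⟨l.take j.toNat, ⟨hpne, hown, hmin⟩, ?_⟩
    unfold bodyD
    rw [← hjdef, hslice_j]
    by_cases hje : j = (l.length : Int)
    · rw [if_pos hje]
      have hpl : l.take j.toNat = l := by
        have hjl : j.toNat = l.length := by omega
        rw [hjl, List.take_length]
      exact Or.inl ⟨by rw [hpl]; exact hlf, rfl⟩
    · rw [if_neg hje]
      have hjlt : j.toNat < l.length := by omega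
      have hnlf : ¬ RLeaf (a.map segsA) (l.take j.toNat) := by
        intro hc
        have he := hc.2.2 l (leaf_mem _ _ hlf) hptake
        have hlen := congrArg List.length he
        rw [hplen] at hlen
        omega
      exact Or.inr ⟨hnlf, rfl⟩
  · rintro ⟨r, ⟨hrne, hrown, hrmin⟩, hrend⟩
    obtain ⟨q, hq, hpre⟩ := hrown.1
    have hqne : q ≠ [] := fun he => hrne (by rw [he] at hpre; exact List.prefix_nil.mp hpre)
    obtain ⟨ℓ, hℓlf, hrℓ⟩ := exists_leaf_above (a.map segsA) r ⟨q, hq, hpre, hqne⟩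
    have hcovℓ : RCov (u.map segsA) ℓ := hrown.2 ℓ hℓlf hrℓ
    have hℓmem : ℓ ∈ coveredD u a := (mem_coveredD u a ℓ).mpr ⟨hℓlf, hcovℓ⟩
    have hℓne : ℓ ≠ [] := hℓlf.1
    have hℓpos : 0 < ℓ.length := List.length_pos_of_ne_nil hℓne
    have hrlen : 0 < r.length := List.length_pos_of_ne_nil hrne
    have hrlenle : r.length ≤ ℓ.length := hrℓ.length_le
    have hrtake : ℓ.take r.length = r := (List.prefix_iff_eq_take.mp hrℓ).symm
    have hℓnotbad : ℓ ∉ badD u a := by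
      rw [not_bad_iff u a ℓ hℓne]
      intro ℓ' hℓ' hpre'
      have he : ℓ' = ℓ := hℓlf.2.2 ℓ' (leaf_mem _ _ hℓ') hpre'
      rw [he]
      exact hcovℓ
    have hslice_m : PySem.List.slice ℓ none (some (ℓ.length : Int)) = ℓ := by
      rw [PySem.List.slice_to _ (by omega)]
      simp
    obtain ⟨hj1, hjm, hjgood, hjbad⟩ := whileK_spec (badD u a) ℓ (ℓ.length + 1) 1 (ℓ.length : Int)
      (by omega) (by omega) (by rw [hslice_m]; exact hℓnotbad) (by omega)
    set j := whileK (badD u a) ℓ (ℓ.length + 1) 1 with hjdef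
    have hrnotbad : r ∉ badD u a := (not_bad_iff u a r hrne).mpr hrown.2
    have hrgood : PySem.List.slice ℓ none (some (r.length : Int)) ∉ badD u a := by
      rw [PySem.List.slice_to _ (by omega)]
      simp only [Int.toNat_natCast]
      rw [hrtake]
      exact hrnotbad
    have hrbelow : ∀ i : Int, 1 ≤ i → i < (r.length : Int) →
        PySem.List.slice ℓ none (some i) ∈ badD u a := by
      intro i h1 h2
      rw [PySem.List.slice_to _ (by omega)]
      have hto : ℓ.take i.toNat = r.take i.toNat := by
        conv_rhs => rw [← hrtake, List.take_take]
        congr 1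
        omega
      have hnown := hrmin i.toNat (by omega) (by omega)
      have hine : r.take i.toNat ≠ [] := by
        have hl2 : (r.take i.toNat).length = i.toNat := by
          rw [List.length_take]
          omega
        intro he
        rw [he] at hl2
        simp at hl2
        omega
      rw [hto]
      by_contra hnb
      apply hnown
      refine ⟨⟨ℓ, leaf_mem _ _ hℓlf, (List.take_prefix _ _).trans hrℓ⟩,
        (not_bad_iff u a _ hine).mp hnb⟩
    have hjeq : j = (r.length : Int) := by
      rcases lt_trichotomy j (r.length : Int) with h | h | h
      · exact absurd (hrbelow j (by omega) h) hjgood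
      · exact h
      · exact absurd (hjbad (r.length : Int) (by omega) h) hrgood
    refine ⟨ℓ, hℓmem, ?_⟩
    unfold bodyD
    rw [← hjdef, hjeq, PySem.List.slice_to _ (by omega)]
    simp only [Int.toNat_natCast]
    rw [hrtake]
    by_cases hre : r.length = ℓ.length
    · have hrl : r = ℓ := hrℓ.eq_of_length_le (le_of_eq hre.symm)
      rw [if_pos (by exact_mod_cast hre)]
      rcases hrend with ⟨-, hx⟩ | ⟨hnlf, -⟩
      · exact hx
      · exact absurd (by rw [hrl]; exact hℓlf) hnlf
    · rw [if_neg (fun h => hre (by exact_mod_cast h))]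
      rcases hrend with ⟨hlf, -⟩ | ⟨-, hx⟩
      · exfalso
        have he : ℓ = r := hlf.2.2 ℓ (leaf_mem _ _ hℓlf) hrℓ
        exact hre (by rw [he])
      · exact hx

theorem outD_nodup (u a : List String) : (outD u a).Nodup := by
  unfold outD
  exact nodup_foldl_add _ _ _ List.nodup_nil

-- ===== VERDICT (by name: the statement is the Claim_ definition above) =====
theorem collapse_permissions_spec : Claim_equal_collapse_permissions := by
  intro u a _
  show collapse_permissions u a = collapse_permissions_alt u a
  have hA : collapse_permissions u a =
      (if PySem.Set.equal (PySem.Set.ofList u) (PySem.Set.ofList a) then ["*"]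
       else PySem.List.sorted
         (PySem.Set.ofList (collapseLoop (buildNested a) (buildNested u) []))
         (fun x => x) false) := rfl
  by_cases hc : PySem.Set.equal (PySem.Set.ofList u) (PySem.Set.ofList a) = true
  · rw [hA, if_pos hc]
    show _ = collapse_permissions_alt u a
    unfold collapse_permissions_alt
    rw [if_pos hc]
  · rw [hA, if_neg hc, alt_eq u a hc]
    have husers : DFF (u.map segsA) := by
      intro p hp
      obtain ⟨x, -, rfl⟩ := List.mem_map.mp hp
      exact segsA_dotfree x
    have hDalls : DFF (a.map segsA) := by
      intro p hp
      obtain ⟨x, -, rfl⟩ := List.mem_map.mp hp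
      exact segsA_dotfree x
    have hitems : (groupB (a.map segsA)).items = gfold (a.map segsA) [] :=
      (groupB_items (a.map segsA)).1
    have hent : ∀ kt ∈ gfold (a.map segsA) [], '.' ∉ kt.1.toList ∧ DFF kt.2 := by
      intro kt hkt
      obtain ⟨k, ts⟩ := kt
      have hmg := mem_gfold (a.map segsA) k ts hkt
      obtain ⟨p, hp, t, hpt⟩ := tailsAt_head k (a.map segsA) (hmg.1 ▸ hmg.2)
      refine ⟨?_, ?_⟩
      · have := hDalls p hp
        rw [hpt] at this
        exact this k (List.mem_cons_self ..)
      · rw [hmg.1]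
        exact tailsAt_dff k (a.map segsA) hDalls
    have htop := top_loop (u.map segsA) husers (gfold (a.map segsA) [])
      hent (groupB_items (a.map segsA)).2 [] (by simp) (by simp)
    obtain ⟨hTeq, hTsh, hTnd⟩ := htop
    have hbuild_a : buildNested a = chainF (gfold (a.map segsA) []) := buildNested_eq a
    have hbuild_u : buildNested u = forestOf (u.map segsA) := by
      rw [buildNested_eq u, ← forestOf_eq_chain]
    rw [hbuild_a, hbuild_u, hTeq]
    -- turn the fold into a flatMap with the user tails substituted
    have hflat : (gfold (a.map segsA) []).foldl (fun out kt =>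
        out ++ (recB kt.2 (PySem.Dict.getD (groupB (u.map segsA)) kt.1 []) kt.1).2) [] =
        (gfold (a.map segsA) []).flatMap (fun kt => (recB kt.2 (tailsAt kt.1 (u.map segsA)) kt.1).2) := by
      have h1 : ∀ kt : String × List (List String),
          (recB kt.2 (PySem.Dict.getD (groupB (u.map segsA)) kt.1 []) kt.1).2 =
          (recB kt.2 (tailsAt kt.1 (u.map segsA)) kt.1).2 := by
        intro kt; rw [getD_groupB]
      calc (gfold (a.map segsA) []).foldl (fun out kt =>
            out ++ (recB kt.2 (PySem.Dict.getD (groupB (u.map segsA)) kt.1 []) kt.1).2) []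
          = (gfold (a.map segsA) []).flatMap
              (fun kt => (recB kt.2 (PySem.Dict.getD (groupB (u.map segsA)) kt.1 []) kt.1).2) := by
            rw [PySem.List.foldl_append_eq_flatMap]; simp
        _ = _ := by
            apply List.flatMap_congr
            intro kt _
            exact h1 kt
    rw [hflat] at hTnd ⊢
    -- both sides are sorted, nodup, and have the same members
    have hperm : ((gfold (a.map segsA) []).flatMap
        (fun kt => (recB kt.2 (tailsAt kt.1 (u.map segsA)) kt.1).2)).Perm (outD u a) := by
      rw [List.perm_ext_iff_of_nodup hTnd (outD_nodup u a)]
      intro x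
      rw [top_mem (u.map segsA) (a.map segsA) x, outD_mem u a x]
    rw [PySem.Set.ofList_eq_self_of_nodup _ hTnd]
    exact (PySem.List.sorted_id_eq_sorted_id_iff_perm _ _).mpr hperm
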